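-- pv_equiv track=rewrite | github.com/gun9311/programmers | baekjoon/programmers/dfs_bfs/oil_bfs.py | solution
-- ===== SOURCE A (Python) =====
-- from collections import deque
--
-- def solution(land):
--     answer = 0
--     result = [0]*len(land[0])
--     oils = deque()
--
--     def bfs(visited,chunk) :
--         while oils :
--             x,y = oils.popleft()
--             chunk += 1
--             for dx, dy in [(0,1),(1,0),(0,-1),(-1,0)]:
--                 nx, ny = x+dx, y+dy
--                 if 0<=nx<len(land) and 0<=ny<len(land[0]) and visited[nx][ny] == False and land[nx][ny] == 1 :
--                     oils.append((nx,ny))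
--                     visited[nx][ny] = True
--         return chunk
--
--     for j in range(len(land[0])):
--         visited = [[False]*len(land[0]) for _ in range(len(land))]
--         chunk = 0
--         for i in range(len(land)):
--             if land[i][j] == 1 and visited[i][j] == False :
--                 oils.append((i,j))
--                 visited[i][j] = True
--                 total = bfs(visited,chunk)
--                 result[j] += total
--
--     answer = max(result)
--     return answer
-- ===== SOURCE B (Python) =====
-- def solution(land):
--     h, w = len(land), len(land[0])
--     seen = set()
--     best = [0] * w
--     for i in range(h):
--         for j in range(w):
--             if land[i][j] == 1 and (i, j) not in seen:
--                 seen.add((i, j))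
--                 stack = [(i, j)]
--                 size = 0
--                 cols = set()
--                 while stack:
--                     x, y = stack.pop()
--                     size += 1
--                     cols.add(y)
--                     for nx, ny in ((x - 1, y), (x + 1, y), (x, y - 1), (x, y + 1)):
--                         if 0 <= nx < h and 0 <= ny < w and land[nx][ny] == 1 and (nx, ny) not in seen:
--                             seen.add((nx, ny))
--                             stack.append((nx, ny))
--                 for c in cols:
--                     best[c] += size
--     return max(best)
-- ===== Notes on version B (the rewrite author's own statement) =====
-- stated objective: faster
-- what changed: B replaces A's per-column re-flooding (a fresh visited matrix and BFS sweep of the whole grid for every column) with a single row-major pass that depth-first flood-fills each component exactly once using an explicit stack and a global visited set, accumulating the component's size and the set of columns it touches, and credits the size to each touched column.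
import Mathlib
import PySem

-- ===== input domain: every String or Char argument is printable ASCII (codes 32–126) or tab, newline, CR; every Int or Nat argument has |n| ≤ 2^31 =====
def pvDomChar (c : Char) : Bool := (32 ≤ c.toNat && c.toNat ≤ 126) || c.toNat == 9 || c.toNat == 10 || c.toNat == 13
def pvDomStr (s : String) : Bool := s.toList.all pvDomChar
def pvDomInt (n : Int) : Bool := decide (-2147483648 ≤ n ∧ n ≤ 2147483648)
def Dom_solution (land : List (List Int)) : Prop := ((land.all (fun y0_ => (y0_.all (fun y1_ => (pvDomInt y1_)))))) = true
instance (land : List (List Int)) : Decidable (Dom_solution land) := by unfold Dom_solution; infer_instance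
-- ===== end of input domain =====

-- B flood-fills each oil component exactly once (explicit-stack DFS over a global visited SET)
-- and credits its size to every column it touches, instead of A's re-running a fresh
-- visited-matrix BFS sweep of the whole grid for every column.
-- (B's Python iterates a set of columns only to perform commuting += updates, so the
-- unmodelled set-iteration order cannot affect the result.)

-- ===== PORT A =====

-- grid / visited-matrix access; an index is only `.toNat`-ed after a `0 ≤ _` guard, so it is exact
def pvLandGet (land : List (List Int)) (x y : Int) : Int := (land.getD x.toNat []).getD y.toNat 0
def pvVisGet (v : List (List Bool)) (x y : Int) : Bool := (v.getD x.toNat []).getD y.toNat true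
def pvVisSet (v : List (List Bool)) (x y : Int) : List (List Bool) :=
  v.set x.toNat ((v.getD x.toNat []).set y.toNat true)
def pvDirs : List (Int × Int) := [(0,1),(1,0),(0,-1),(-1,0)]

/-- the `for dx, dy in …` neighbour scan of A's BFS loop -/
def pvScan (land : List (List Int)) (h w : Int) (p : Int × Int) (dirs : List (Int × Int))
    (st : List (Int × Int) × List (List Bool)) : List (Int × Int) × List (List Bool) :=
  dirs.foldl (fun st d =>
    let nx := p.1 + d.1
    let ny := p.2 + d.2
    if 0 ≤ nx ∧ nx < h ∧ 0 ≤ ny ∧ ny < w ∧ pvVisGet st.2 nx ny = false ∧ pvLandGet land nx ny = 1 then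
      (st.1 ++ [(nx, ny)], pvVisSet st.2 nx ny)
    else st) st

/-- number of `false` entries of the visited matrix (termination measure only) -/
def pvUC (v : List (List Bool)) : Nat := (v.map (fun r => r.count false)).sum

lemma pvUC_set_lt (v : List (List Bool)) (i j : Nat) (hi : i < v.length)
    (hj : j < v[i].length) (hf : v[i][j] = false) :
    pvUC (v.set i (v[i].set j true)) < pvUC v := by
  induction v generalizing i with
  | nil => simp at hi
  | cons r t ih =>
    cases i with
    | zero =>
      simp only [List.getElem_cons_zero] at hj hf ⊢
      simp only [List.set_cons_zero, pvUC, List.map_cons, List.sum_cons]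
      have hcnt : (r.set j true).count false < r.count false := by
        rw [List.count_set hj]
        have hpos : 0 < r.count false := by
          rw [List.count_pos_iff]
          exact hf ▸ List.getElem_mem hj
        simp only [hf, beq_self_eq_true, if_true, beq_iff_eq, reduceCtorEq, if_false]
        omega
      omega
    | succ k =>
      simp only [List.getElem_cons_succ] at hj hf ⊢
      simp only [List.set_cons_succ, pvUC, List.map_cons, List.sum_cons]
      have := ih k (by simpa using hi) hj hf
      simp only [pvUC] at this
      omega

lemma pvVisSet_uc (v : List (List Bool)) (x y : Int) (h : pvVisGet v x y = false) :
    pvUC (pvVisSet v x y) < pvUC v := by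
  unfold pvVisGet at h
  have hi : x.toNat < v.length := by
    by_contra hi
    rw [List.getD_eq_default v [] (by omega)] at h
    simp at h
  rw [List.getD_eq_getElem v [] hi] at h
  have hj : y.toNat < v[x.toNat].length := by
    by_contra hj
    rw [List.getD_eq_default v[x.toNat] true (by omega)] at h
    exact absurd h (by simp)
  rw [List.getD_eq_getElem v[x.toNat] true hj] at h
  unfold pvVisSet
  rw [List.getD_eq_getElem v [] hi]
  exact pvUC_set_lt v x.toNat y.toNat hi hj h

lemma pvScan_measure (land : List (List Int)) (h w : Int) (p : Int × Int) (dirs : List (Int × Int))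
    (st : List (Int × Int) × List (List Bool)) :
    2 * pvUC (pvScan land h w p dirs st).2 + (pvScan land h w p dirs st).1.length ≤
      2 * pvUC st.2 + st.1.length := by
  induction dirs generalizing st with
  | nil => simp [pvScan]
  | cons d ds ih =>
    simp only [pvScan, List.foldl_cons] at *
    refine le_trans (ih _) ?_
    split
    case isTrue hg =>
      have := pvVisSet_uc st.2 (p.1 + d.1) (p.2 + d.2) hg.2.2.2.2.1
      simp only [List.length_append, List.length_cons, List.length_nil]
      omega
    case isFalse => exact le_refl _

/-- A's `bfs`: pop the queue head, count it, enqueue fresh oil neighbours -/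
def bfsA (land : List (List Int)) (h w : Int) :
    List (Int × Int) → List (List Bool) → Int → Int × List (List Bool)
  | [], visited, chunk => (chunk, visited)
  | p :: rest, visited, chunk =>
    let st := pvScan land h w p pvDirs (rest, visited)
    bfsA land h w st.1 st.2 (chunk + 1)
termination_by oils visited _ => 2 * pvUC visited + oils.length
decreasing_by
  have hm := pvScan_measure land h w p pvDirs (rest, visited)
  simp only [List.length_cons] at hm ⊢
  omega

def pvAddAt (xs : List Int) (j : Int) (t : Int) : List Int :=
  xs.set j.toNat (xs.getD j.toNat 0 + t)

/-- body of A's `for i in range(len(land))` seed loop for column `j` -/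
def pvStepA (land : List (List Int)) (h w j : Int) (st : List (List Bool) × List Int) (i : Int) :
    List (List Bool) × List Int :=
  if pvLandGet land i j = 1 ∧ pvVisGet st.1 i j = false then
    let visited := pvVisSet st.1 i j
    let r := bfsA land h w [(i, j)] visited 0
    (r.2, pvAddAt st.2 j r.1)
  else st

def solution (land : List (List Int)) : Int :=
  let h : Int := land.length
  let w : Int := (land.headD []).length
  let result : List Int := (PySem.List.pyRange 0 w 1).foldl (fun result j =>
    ((PySem.List.pyRange 0 h 1).foldl (pvStepA land h w j)
      (List.replicate h.toNat (List.replicate w.toNat false), result)).2)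
    (List.replicate w.toNat 0)
  (PySem.List.max? result (fun y => y)).getD 0

-- ===== PORT B =====

/-- `land[p]` for B (rows that do not exist read as 0; B only evaluates it behind bounds guards) -/
def cellB (land : List (List Int)) (p : Int × Int) : Int :=
  (land.getD p.1.toNat []).getD p.2.toNat 0

/-- the tuple `((x-1,y),(x+1,y),(x,y-1),(x,y+1))` of B's neighbour loop -/
def nbrsB (x y : Int) : List (Int × Int) := [(x - 1, y), (x + 1, y), (x, y - 1), (x, y + 1)]

/-- B's `if 0<=nx<h and 0<=ny<w and land[nx][ny]==1 and (nx,ny) not in seen: seen.add; stack.append` -/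
def pushB (land : List (List Int)) (h w : Int)
    (st : List (Int × Int) × PySem.Set (Int × Int)) (n : Int × Int) :
    List (Int × Int) × PySem.Set (Int × Int) :=
  if 0 ≤ n.1 ∧ n.1 < h ∧ 0 ≤ n.2 ∧ n.2 < w ∧ cellB land n = 1 ∧ ¬ n ∈ st.2 then
    (n :: st.1, PySem.Set.add st.2 n)
  else st

-- the full cell grid and the count of not-yet-seen cells (termination measure only)
def pvGridB (h w : Int) : List (Int × Int) :=
  (List.range h.toNat).flatMap (fun a =>
    (List.range w.toNat).map (fun b => (Int.ofNat a, Int.ofNat b)))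

def pvUnseen (h w : Int) (s : PySem.Set (Int × Int)) : Nat :=
  ((pvGridB h w).filter (fun c => decide (¬ c ∈ s))).length

lemma pvLenFilterMono (L : List (Int × Int)) (p q : (Int × Int) → Bool) (h : ∀ a, p a → q a) :
    (L.filter p).length ≤ (L.filter q).length := by
  induction L with
  | nil => simp
  | cons a t ih =>
    simp only [List.filter_cons]
    by_cases hp : p a
    · rw [if_pos hp, if_pos (h a hp)]
      simpa using ih
    · rw [if_neg hp]
      split
      · exact le_trans ih (by simp)
      · exact ih

lemma pvFilterNotMemLt (L : List (Int × Int)) (s : List (Int × Int)) (n : Int × Int)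
    (hL : n ∈ L) (hn : n ∉ s) :
    (L.filter (fun c => decide (¬ c ∈ s ++ [n]))).length <
      (L.filter (fun c => decide (¬ c ∈ s))).length := by
  have hmono : ∀ a : Int × Int, decide (¬ a ∈ s ++ [n]) = true → decide (¬ a ∈ s) = true := by
    intro a ha
    simp only [decide_eq_true_eq, List.mem_append, List.mem_singleton] at *
    tauto
  induction L with
  | nil => simp at hL
  | cons a t ih =>
    simp only [List.filter_cons]
    by_cases han : a = n
    · subst han
      have hnew : ¬ (decide (¬ a ∈ s ++ [a]) = true) := by simp
      have hold : decide (¬ a ∈ s) = true := by simp [hn]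
      rw [if_neg hnew, if_pos hold]
      have := pvLenFilterMono t _ _ hmono
      simp only [List.length_cons]
      omega
    · rcases List.mem_cons.mp hL with h | h
      · exact absurd h.symm han
      · have := ih h
        by_cases hp : decide (¬ a ∈ s ++ [n]) = true
        · rw [if_pos hp, if_pos (hmono a hp)]
          simpa using this
        · rw [if_neg hp]
          split
          · simp only [List.length_cons]; omega
          · exact this

lemma pvMemGridB (h w : Int) (n : Int × Int) (h1 : 0 ≤ n.1) (h2 : n.1 < h)
    (h3 : 0 ≤ n.2) (h4 : n.2 < w) : n ∈ pvGridB h w := by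
  have e : n = (Int.ofNat n.1.toNat, Int.ofNat n.2.toNat) := by
    rw [Prod.ext_iff]
    exact ⟨by simp; omega, by simp; omega⟩
  have hm1 : n.1.toNat ∈ List.range h.toNat := List.mem_range.mpr (by omega)
  have hm2 : n.2.toNat ∈ List.range w.toNat := List.mem_range.mpr (by omega)
  rw [e]
  exact List.mem_flatMap.mpr ⟨n.1.toNat, hm1, List.mem_map.mpr ⟨n.2.toNat, hm2, rfl⟩⟩

lemma pushB_measure (land : List (List Int)) (h w : Int) (ds : List (Int × Int))
    (st : List (Int × Int) × PySem.Set (Int × Int)) :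
    2 * pvUnseen h w (ds.foldl (pushB land h w) st).2 + (ds.foldl (pushB land h w) st).1.length ≤
      2 * pvUnseen h w st.2 + st.1.length := by
  induction ds generalizing st with
  | nil => simp
  | cons d t ih =>
    simp only [List.foldl_cons]
    refine le_trans (ih _) ?_
    unfold pushB
    split
    case isTrue hg =>
      obtain ⟨g1, g2, g3, g4, _, g6⟩ := hg
      have hadd : PySem.Set.add st.2 d = st.2 ++ [d] := PySem.Set.add_of_not_mem g6
      have hlt : pvUnseen h w (PySem.Set.add st.2 d) < pvUnseen h w st.2 := by
        rw [hadd]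
        exact pvFilterNotMemLt _ _ _ (pvMemGridB h w d g1 g2 g3 g4) g6
      simp only [List.length_cons]
      omega
    case isFalse => exact le_refl _

/-- B's `while stack` DFS: pop the top, count it, record its column, push fresh oil neighbours -/
def dfsB (land : List (List Int)) (h w : Int) :
    List (Int × Int) → PySem.Set (Int × Int) → Int → PySem.Set Int →
      Int × PySem.Set Int × PySem.Set (Int × Int)
  | [], seen, size, cols => (size, cols, seen)
  | p :: rest, seen, size, cols =>
    let st := (nbrsB p.1 p.2).foldl (pushB land h w) (rest, seen)
    dfsB land h w st.1 st.2 (size + 1) (PySem.Set.add cols p.2)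
termination_by stack seen _ _ => 2 * pvUnseen h w seen + stack.length
decreasing_by
  have hm := pushB_measure land h w (nbrsB p.1 p.2) (rest, seen)
  simp only [List.length_cons] at hm ⊢
  omega

/-- `best[c] += size` -/
def creditB (best : List Int) (c : Int) (size : Int) : List Int :=
  best.set c.toNat (best.getD c.toNat 0 + size)

/-- body of B's inner `for j in range(w)` loop at row `i` -/
def visitB (land : List (List Int)) (h w i : Int)
    (st : PySem.Set (Int × Int) × List Int) (j : Int) : PySem.Set (Int × Int) × List Int :=
  if cellB land (i, j) = 1 ∧ ¬ (i, j) ∈ st.1 then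
    let r := dfsB land h w [(i, j)] (PySem.Set.add st.1 (i, j)) 0 PySem.Set.empty
    (r.2.2, r.2.1.foldl (fun best c => creditB best c r.1) st.2)
  else st

def solution_alt (land : List (List Int)) : Int :=
  let h : Int := land.length
  let w : Int := (land.headD []).length
  let st := (PySem.List.pyRange 0 h 1).foldl (fun st i =>
    (PySem.List.pyRange 0 w 1).foldl (visitB land h w i) st)
    ((PySem.Set.empty : PySem.Set (Int × Int)), List.replicate w.toNat 0)
  (PySem.List.max? st.2 (fun y => y)).getD 0

-- ===== PRECONDITION & SPEC =====
-- Pre_ excludes exactly the inputs where Python A raises: empty land (IndexError on land[0]),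
-- an empty first row (ValueError from max([])), and a row shorter than row 0 (IndexError on
-- land[i][j], which A reads for every cell).  The Lean ports are total and the equivalence
-- happens to hold on all inputs, so the proof does not need the Pre_ hypothesis; Pre_ only
-- delimits where Python A returns a value.
def Pre_solution (land : List (List Int)) : Prop :=
  land ≠ [] ∧ land.headD [] ≠ [] ∧ ∀ row ∈ land, (land.headD []).length ≤ row.length
instance (land : List (List Int)) : Decidable (Pre_solution land) := by
  unfold Pre_solution; infer_instance
def pvWitness_solution : List (List Int) := [[1, 0], [0, 1]]
def Spec_solution (land : List (List Int)) (out : Int) : Prop := out = solution_alt land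
instance (land : List (List Int)) (out : Int) : Decidable (Spec_solution land out) := by
  unfold Spec_solution; infer_instance

-- ===== CLAIM (what is proved, stated in full; the proofs are below) =====
def Claim_equal_solution : Prop := ∀ (land : List (List Int)), Dom_solution land → Pre_solution land → Spec_solution land (solution land)

-- ===== LEMMAS AND PROOFS =====

/-! Spec-side vocabulary: the oil grid, 4-adjacency, reachability. -/

def InGrid (land : List (List Int)) (p : Int × Int) : Prop :=
  0 ≤ p.1 ∧ p.1 < (land.length : Int) ∧ 0 ≤ p.2 ∧ p.2 < ((land.headD []).length : Int)

def OilAt (land : List (List Int)) (p : Int × Int) : Prop :=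
  InGrid land p ∧ pvLandGet land p.1 p.2 = 1

def Nbrs (p : Int × Int) : List (Int × Int) := pvDirs.map (fun d => (p.1 + d.1, p.2 + d.2))

def StepR (land : List (List Int)) (p q : Int × Int) : Prop :=
  OilAt land p ∧ OilAt land q ∧ q ∈ Nbrs p

def Reach (land : List (List Int)) : Int × Int → Int × Int → Prop :=
  Relation.ReflTransGen (StepR land)

def Vis (v : List (List Bool)) (p : Int × Int) : Prop := pvVisGet v p.1 p.2 = true

/-- oil cells connected to some seed satisfying `S` -/
def FSet (land : List (List Int)) (S : Int × Int → Prop) (c : Int × Int) : Prop :=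
  OilAt land c ∧ ∃ s, S s ∧ OilAt land s ∧ Reach land s c

/-- cells already flooded after the first `t` seeds `(0,j) … (t-1,j)` of column `j` (A's sweep) -/
def USet (land : List (List Int)) (j t : Int) : (Int × Int) → Prop :=
  FSet land (fun s => s.1 < t ∧ s.2 = j)

/-- all oil connected to column `j` -/
def RSet (land : List (List Int)) (j : Int) : (Int × Int) → Prop :=
  FSet land (fun s => s.2 = j)

/-- cells already flooded once B's row-major scan has passed the cells before `(i, j)` -/
def BSet (land : List (List Int)) (i j : Int) : (Int × Int) → Prop :=
  FSet land (fun s => s.1 < i ∨ (s.1 = i ∧ s.2 < j))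

/-- `val` is the size of the oil region connected to column `k` -/
def ColOK (land : List (List Int)) (k : Int) (val : Int) : Prop :=
  ∃ L : List (Int × Int), L.Nodup ∧ (∀ p, p ∈ L ↔ RSet land k p) ∧ val = (L.length : Int)

/-- B's loop invariant before processing cell `(i, j)` -/
def InvB (land : List (List Int)) (i j : Int) (st : PySem.Set (Int × Int) × List Int) : Prop :=
  (∀ p, p ∈ st.1 ↔ BSet land i j p) ∧
  st.2.length = (land.headD []).length ∧
  ∀ k : ℕ, k < (land.headD []).length →
    ∃ Lk : List (Int × Int), Lk.Nodup ∧
      (∀ p, p ∈ Lk ↔ (BSet land i j p ∧ RSet land (k : Int) p)) ∧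
      st.2.getD k 0 = (Lk.length : Int)

lemma fset_closed (land : List (List Int)) (S : Int × Int → Prop) (z : Int × Int)
    (hz : FSet land S z) : ∀ m ∈ Nbrs z, OilAt land m → FSet land S m := by
  intro m hmN hOm
  obtain ⟨hOz, x, hSx, hOx, hRx⟩ := hz
  exact ⟨hOm, x, hSx, hOx, hRx.tail ⟨hOz, hOm, hmN⟩⟩

lemma fset_absorb (land : List (List Int)) (S : Int × Int → Prop) (s : Int × Int)
    (hin : FSet land S s) : ∀ p, OilAt land p → Reach land s p → FSet land S p := by
  intro p hOp hRp
  obtain ⟨_, x, hSx, hOx, hRx⟩ := hin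
  exact ⟨hOp, x, hSx, hOx, hRx.trans hRp⟩

lemma fset_mono (land : List (List Int)) (S S' : Int × Int → Prop) (h : ∀ x, S x → S' x)
    (p : Int × Int) (hp : FSet land S p) : FSet land S' p := by
  obtain ⟨hO, x, hS, hOx, hR⟩ := hp
  exact ⟨hO, x, h x hS, hOx, hR⟩

/-- adding one fresh seed `s` to the seed family adds exactly `s`'s component -/
lemma fset_add_seed (land : List (List Int)) (S S' : Int × Int → Prop) (s : Int × Int)
    (hS' : ∀ x, S' x ↔ S x ∨ x = s) (hOs : OilAt land s) (p : Int × Int) :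
    FSet land S' p ↔ FSet land S p ∨ (OilAt land p ∧ Reach land s p) := by
  constructor
  · rintro ⟨hO, x, hS, hOx, hR⟩
    rcases (hS' x).mp hS with h | h
    · exact Or.inl ⟨hO, x, h, hOx, hR⟩
    · exact Or.inr ⟨hO, h ▸ hR⟩
  · rintro (⟨hO, x, hS, hOx, hR⟩ | ⟨hO, hR⟩)
    · exact ⟨hO, x, (hS' x).mpr (Or.inl hS), hOx, hR⟩
    · exact ⟨hO, s, (hS' s).mpr (Or.inr rfl), hOs, hR⟩

/-- a seed that is already flooded adds nothing -/
lemma fset_dup_seed (land : List (List Int)) (S S' : Int × Int → Prop) (s : Int × Int)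
    (hS' : ∀ x, S' x ↔ S x ∨ x = s) (hin : FSet land S s) (p : Int × Int) :
    FSet land S' p ↔ FSet land S p := by
  constructor
  · rintro ⟨hO, x, hS, hOx, hR⟩
    rcases (hS' x).mp hS with h | h
    · exact ⟨hO, x, h, hOx, hR⟩
    · exact fset_absorb land S s hin p hO (h ▸ hR)
  · exact fset_mono land S S' (fun x hx => (hS' x).mpr (Or.inl hx)) p

/-- a non-oil seed adds nothing -/
lemma fset_dead_seed (land : List (List Int)) (S S' : Int × Int → Prop) (s : Int × Int)
    (hS' : ∀ x, S' x ↔ S x ∨ x = s) (hdead : ¬ OilAt land s) (p : Int × Int) :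
    FSet land S' p ↔ FSet land S p := by
  constructor
  · rintro ⟨hO, x, hS, hOx, hR⟩
    rcases (hS' x).mp hS with h | h
    · exact ⟨hO, x, h, hOx, hR⟩
    · exact absurd (h ▸ hOx) hdead
  · exact fset_mono land S S' (fun x hx => (hS' x).mpr (Or.inl hx)) p

lemma nbrs_symm (p q : Int × Int) (h : q ∈ Nbrs p) : p ∈ Nbrs q := by
  simp only [Nbrs, pvDirs, List.map_cons, List.map_nil, List.mem_cons, List.not_mem_nil,
    or_false, Prod.ext_iff] at h ⊢
  omega

lemma step_symm (land : List (List Int)) : Symmetric (StepR land) := by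
  intro p q h
  exact ⟨h.2.1, h.1, nbrs_symm p q h.2.2⟩

lemma reach_symm (land : List (List Int)) {p q : Int × Int} (h : Reach land p q) :
    Reach land q p := Relation.ReflTransGen.symmetric (step_symm land) h

lemma getD_set_true (r : List Bool) (i k : Nat) (h : r.getD k true = true) :
    (r.set i true).getD k true = true := by
  by_cases hik : k = i
  · subst hik
    by_cases hk : k < r.length
    · rw [List.getD_eq_getElem?_getD, List.getElem?_set_self hk]; rfl
    · rw [List.set_eq_of_length_le (by omega)]; exact h
  · rw [List.getD_eq_getElem?_getD, List.getElem?_set_ne (Ne.symm hik),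
      ← List.getD_eq_getElem?_getD]; exact h

lemma visSet_mono (v : List (List Bool)) (x y : Int) (p : Int × Int)
    (h : pvVisGet v p.1 p.2 = true) : pvVisGet (pvVisSet v x y) p.1 p.2 = true := by
  unfold pvVisGet pvVisSet at *
  by_cases hix : p.1.toNat = x.toNat
  · rw [hix] at h ⊢
    by_cases hlen : x.toNat < v.length
    · have hrow : (v.set x.toNat ((v.getD x.toNat []).set y.toNat true)).getD x.toNat [] =
          (v.getD x.toNat []).set y.toNat true := by
        rw [List.getD_eq_getElem?_getD, List.getElem?_set_self hlen]; rfl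
      rw [hrow]
      exact getD_set_true _ _ _ h
    · rw [List.set_eq_of_length_le (by omega)]; exact h
  · have hrow : (v.set x.toNat ((v.getD x.toNat []).set y.toNat true)).getD p.1.toNat [] =
        v.getD p.1.toNat [] := by
      rw [List.getD_eq_getElem?_getD, List.getElem?_set_ne (Ne.symm hix),
        ← List.getD_eq_getElem?_getD]
    rw [hrow]
    exact h

lemma visGet_visSet_iff (v : List (List Bool)) (x y : Int) (hx : 0 ≤ x) (hy : 0 ≤ y)
    (hf : pvVisGet v x y = false) (z : Int × Int) (hz1 : 0 ≤ z.1) (hz2 : 0 ≤ z.2) :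
    (pvVisGet (pvVisSet v x y) z.1 z.2 = true ↔ pvVisGet v z.1 z.2 = true ∨ z = (x, y)) := by
  have hzeq : z = (x, y) ↔ (z.1.toNat = x.toNat ∧ z.2.toNat = y.toNat) := by
    rw [Prod.ext_iff]; omega
  unfold pvVisGet at hf
  have hi : x.toNat < v.length := by
    by_contra hi
    rw [List.getD_eq_default v [] (by omega)] at hf
    simp at hf
  rw [List.getD_eq_getElem v [] hi] at hf
  have hj : y.toNat < v[x.toNat].length := by
    by_contra hj
    rw [List.getD_eq_default v[x.toNat] true (by omega)] at hf
    exact absurd hf (by simp)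
  rw [List.getD_eq_getElem v[x.toNat] true hj] at hf
  unfold pvVisGet pvVisSet
  rw [List.getD_eq_getElem v [] hi]
  by_cases hix : z.1.toNat = x.toNat
  · have hrow : (v.set x.toNat (v[x.toNat].set y.toNat true)).getD z.1.toNat [] =
        v[x.toNat].set y.toNat true := by
      rw [hix, List.getD_eq_getElem?_getD, List.getElem?_set_self hi]; rfl
    rw [hrow]
    by_cases hjy : z.2.toNat = y.toNat
    · have h1 : (v[x.toNat].set y.toNat true).getD z.2.toNat true = true := by
        rw [hjy, List.getD_eq_getElem?_getD, List.getElem?_set_self hj]; rfl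
      have h2 : v.getD z.1.toNat [] = v[x.toNat] := by rw [hix, List.getD_eq_getElem v [] hi]
      rw [h1, h2]
      simp only [true_iff]
      exact Or.inr (hzeq.mpr ⟨hix, hjy⟩)
    · have h1 : (v[x.toNat].set y.toNat true).getD z.2.toNat true =
          v[x.toNat].getD z.2.toNat true := by
        rw [List.getD_eq_getElem?_getD, List.getElem?_set_ne (Ne.symm hjy),
          ← List.getD_eq_getElem?_getD]
      have h2 : v.getD z.1.toNat [] = v[x.toNat] := by rw [hix, List.getD_eq_getElem v [] hi]
      rw [h1, h2]
      have : ¬ z = (x, y) := fun hc => hjy (hzeq.mp hc).2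
      simp [this]
  · have hrow : (v.set x.toNat (v[x.toNat].set y.toNat true)).getD z.1.toNat [] =
        v.getD z.1.toNat [] := by
      rw [List.getD_eq_getElem?_getD, List.getElem?_set_ne (Ne.symm hix),
        ← List.getD_eq_getElem?_getD]
    rw [hrow]
    have : ¬ z = (x, y) := fun hc => hix (hzeq.mp hc).1
    simp [this]

lemma visGet_fresh (a b : Nat) (z : Int × Int) :
    pvVisGet (List.replicate a (List.replicate b false)) z.1 z.2 =
      !(decide (z.1.toNat < a) && decide (z.2.toNat < b)) := by
  unfold pvVisGet
  by_cases h1 : z.1.toNat < a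
  · have hrow : (List.replicate a (List.replicate b false)).getD z.1.toNat [] =
        List.replicate b false := by
      rw [List.getD_eq_getElem?_getD, List.getElem?_replicate_of_lt h1]; rfl
    rw [hrow]
    by_cases h2 : z.2.toNat < b
    · rw [List.getD_eq_getElem?_getD, List.getElem?_replicate_of_lt h2]
      simp [h1, h2]
    · rw [List.getD_eq_default _ _ (by simpa using h2)]
      simp [h1, h2]
  · have hrow : (List.replicate a (List.replicate b false)).getD z.1.toNat [] =
        ([] : List Bool) :=
      List.getD_eq_default _ _ (by simpa using h1)
    rw [hrow]
    simp [h1]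

lemma vis_propagate (land : List (List Int)) (v : List (List Bool))
    (hcl : ∀ p, InGrid land p → Vis v p → ∀ m ∈ Nbrs p, OilAt land m → Vis v m)
    {p q : Int × Int} (hp : Vis v p) (h : Reach land p q) : Vis v q := by
  induction h with
  | refl => exact hp
  | tail _ hstep ih => exact hcl _ hstep.1.1 ih _ hstep.2.2 hstep.2.1

/-- what one neighbour scan (`pvScan`) does -/
lemma pvScan_spec (land : List (List Int)) (p : Int × Int) (dirs : List (Int × Int))
    (q : List (Int × Int)) (v : List (List Bool)) :
    ∃ new : List (Int × Int),
      (pvScan land (land.length : Int) ((land.headD []).length : Int) p dirs (q, v)).1 = q ++ new ∧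
      new.Nodup ∧
      (∀ n ∈ new, (∃ d ∈ dirs, n = (p.1 + d.1, p.2 + d.2)) ∧ OilAt land n ∧
        pvVisGet v n.1 n.2 = false) ∧
      (∀ z : Int × Int, 0 ≤ z.1 → 0 ≤ z.2 →
        (Vis (pvScan land (land.length : Int) ((land.headD []).length : Int) p dirs (q, v)).2 z ↔
          Vis v z ∨ z ∈ new)) ∧
      (∀ d ∈ dirs, OilAt land (p.1 + d.1, p.2 + d.2) →
        Vis (pvScan land (land.length : Int) ((land.headD []).length : Int) p dirs (q, v)).2
          (p.1 + d.1, p.2 + d.2)) ∧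
      (∀ z, Vis v z →
        Vis (pvScan land (land.length : Int) ((land.headD []).length : Int) p dirs (q, v)).2 z) := by
  induction dirs generalizing q v with
  | nil =>
    refine ⟨[], by simp [pvScan], List.nodup_nil, by simp, ?_, by simp, ?_⟩
    · intro z _ _; simp [pvScan]
    · intro z hz; simpa [pvScan] using hz
  | cons d ds ih =>
    have hunf : pvScan land (land.length : Int) ((land.headD []).length : Int) p (d :: ds) (q, v) =
        pvScan land (land.length : Int) ((land.headD []).length : Int) p ds
          (if 0 ≤ p.1 + d.1 ∧ p.1 + d.1 < (land.length : Int) ∧ 0 ≤ p.2 + d.2 ∧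
              p.2 + d.2 < ((land.headD []).length : Int) ∧
              pvVisGet v (p.1 + d.1) (p.2 + d.2) = false ∧
              pvLandGet land (p.1 + d.1) (p.2 + d.2) = 1 then
            (q ++ [(p.1 + d.1, p.2 + d.2)], pvVisSet v (p.1 + d.1) (p.2 + d.2))
          else (q, v)) := rfl
    by_cases hg : 0 ≤ p.1 + d.1 ∧ p.1 + d.1 < (land.length : Int) ∧ 0 ≤ p.2 + d.2 ∧
        p.2 + d.2 < ((land.headD []).length : Int) ∧
        pvVisGet v (p.1 + d.1) (p.2 + d.2) = false ∧ pvLandGet land (p.1 + d.1) (p.2 + d.2) = 1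
    · rw [hunf, if_pos hg]
      obtain ⟨hb1, hb2, hb3, hb4, hvf, hl1⟩ := hg
      have hOil : OilAt land (p.1 + d.1, p.2 + d.2) := ⟨⟨hb1, hb2, hb3, hb4⟩, hl1⟩
      obtain ⟨new', h1, h2, h3, h4, h5, h6⟩ :=
        ih (q ++ [(p.1 + d.1, p.2 + d.2)]) (pvVisSet v (p.1 + d.1) (p.2 + d.2))
      have hself : Vis (pvVisSet v (p.1 + d.1) (p.2 + d.2)) (p.1 + d.1, p.2 + d.2) :=
        (visGet_visSet_iff v _ _ hb1 hb3 hvf (p.1 + d.1, p.2 + d.2) hb1 hb3).mpr (Or.inr rfl)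
      refine ⟨(p.1 + d.1, p.2 + d.2) :: new', ?_, ?_, ?_, ?_, ?_, ?_⟩
      · rw [h1]; simp
      · refine List.nodup_cons.mpr ⟨?_, h2⟩
        intro hmem
        have hf := (h3 _ hmem).2.2
        unfold Vis at hself
        rw [hf] at hself
        exact absurd hself (by simp)
      · intro n hn
        rcases List.mem_cons.mp hn with hn | hn
        · exact ⟨⟨d, List.mem_cons_self .., hn⟩, hn ▸ hOil, hn ▸ hvf⟩
        · obtain ⟨⟨d', hd', he⟩, hO', hv'⟩ := h3 n hn
          refine ⟨⟨d', List.mem_cons_of_mem _ hd', he⟩, hO', ?_⟩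
          cases hvb : pvVisGet v n.1 n.2 with
          | false => rfl
          | true => rw [visSet_mono v _ _ n hvb] at hv'; exact absurd hv' (by simp)
      · intro z hz1 hz2
        rw [h4 z hz1 hz2, Vis,
          visGet_visSet_iff v _ _ hb1 hb3 hvf z hz1 hz2]
        simp only [List.mem_cons]
        tauto
      · intro d' hd' hO'
        rcases List.mem_cons.mp hd' with hd' | hd'
        · subst hd'; exact h6 _ hself
        · exact h5 d' hd' hO'
      · intro z hz
        exact h6 z (visSet_mono v _ _ z hz)
    · rw [hunf, if_neg hg]
      obtain ⟨new', h1, h2, h3, h4, h5, h6⟩ := ih q v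
      refine ⟨new', h1, h2, ?_, h4, ?_, h6⟩
      · intro n hn
        obtain ⟨⟨d', hd', he⟩, hO', hv'⟩ := h3 n hn
        exact ⟨⟨d', List.mem_cons_of_mem _ hd', he⟩, hO', hv'⟩
      · intro d' hd' hO'
        rcases List.mem_cons.mp hd' with hd' | hd'
        · subst hd'
          cases hvb : pvVisGet v (p.1 + d'.1) (p.2 + d'.2) with
          | false =>
            exact absurd ⟨hO'.1.1, hO'.1.2.1, hO'.1.2.2.1, hO'.1.2.2.2, hvb, hO'.2⟩ hg
          | true => exact h6 _ hvb
        · exact h5 d' hd' hO'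

lemma mem_nbrs_iff (p n : Int × Int) :
    n ∈ Nbrs p ↔ ∃ d ∈ pvDirs, n = (p.1 + d.1, p.2 + d.2) := by
  simp [Nbrs, List.mem_map, eq_comm]

/-- A-side ghost: the BFS loop collecting the popped cells instead of counting them -/
def bfsCells (land : List (List Int)) (h w : Int) :
    List (Int × Int) → List (List Bool) → List (Int × Int) × List (List Bool)
  | [], visited => ([], visited)
  | p :: rest, visited =>
    let st := pvScan land h w p pvDirs (rest, visited)
    let r := bfsCells land h w st.1 st.2
    (p :: r.1, r.2)
termination_by oils visited => 2 * pvUC visited + oils.length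
decreasing_by
  have hm := pvScan_measure land h w p pvDirs (rest, visited)
  simp only [List.length_cons] at hm ⊢
  omega

/-- the queue invariant of A's BFS loop, by strong induction on the termination measure -/
lemma bfsCells_master (land : List (List Int)) (s : Int × Int) (V0 : Int × Int → Prop) :
    ∀ (n : ℕ) (q : List (Int × Int)) (v : List (List Bool)),
      2 * pvUC v + q.length ≤ n →
      (∀ p ∈ q, OilAt land p ∧ Vis v p ∧ Reach land s p) →
      q.Nodup →
      (∀ p, InGrid land p → Vis v p → V0 p ∨ (OilAt land p ∧ Reach land s p)) →
      (∀ p, InGrid land p → V0 p → Vis v p) →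
      (∀ p, InGrid land p → Vis v p → ¬ V0 p → p ∉ q → ∀ m ∈ Nbrs p, OilAt land m → Vis v m) →
      (∀ p, InGrid land p →
        (Vis (bfsCells land (land.length : Int) ((land.headD []).length : Int) q v).2 p ↔
          Vis v p ∨ p ∈ (bfsCells land (land.length : Int) ((land.headD []).length : Int) q v).1)) ∧
      (bfsCells land (land.length : Int) ((land.headD []).length : Int) q v).1.Nodup ∧
      (∀ p ∈ (bfsCells land (land.length : Int) ((land.headD []).length : Int) q v).1,
        OilAt land p ∧ Reach land s p) ∧
      (∀ p ∈ q, p ∈ (bfsCells land (land.length : Int) ((land.headD []).length : Int) q v).1) ∧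
      (∀ p ∈ (bfsCells land (land.length : Int) ((land.headD []).length : Int) q v).1,
        p ∈ q ∨ ¬ Vis v p) ∧
      (∀ p, InGrid land p →
        Vis (bfsCells land (land.length : Int) ((land.headD []).length : Int) q v).2 p → ¬ V0 p →
        ∀ m ∈ Nbrs p, OilAt land m →
          Vis (bfsCells land (land.length : Int) ((land.headD []).length : Int) q v).2 m) := by
  intro n
  induction n with
  | zero =>
    intro q v hm hq hnd h3 h4 h5
    cases q with
    | nil =>
      refine ⟨?_, by simp [bfsCells], by simp [bfsCells], by simp, by simp [bfsCells], ?_⟩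
      · intro p _; simp [bfsCells]
      · intro p hIG hV hV0 m hm' hO
        have := h5 p hIG (by simpa [bfsCells] using hV) hV0 (by simp) m hm' hO
        simpa [bfsCells] using this
    | cons p rest => simp at hm
  | succ n ih =>
    intro q v hm hq hnd h3 h4 h5
    cases q with
    | nil =>
      refine ⟨?_, by simp [bfsCells], by simp [bfsCells], by simp, by simp [bfsCells], ?_⟩
      · intro p _; simp [bfsCells]
      · intro p hIG hV hV0 m hm' hO
        have := h5 p hIG (by simpa [bfsCells] using hV) hV0 (by simp) m hm' hO
        simpa [bfsCells] using this
    | cons p rest =>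
      obtain ⟨hOp, hVp, hRp⟩ := hq p (List.mem_cons_self ..)
      obtain ⟨new, s1, s2, s3, s4, s5, s6⟩ := pvScan_spec land p pvDirs rest v
      have hms := pvScan_measure land (land.length : Int) ((land.headD []).length : Int)
        p pvDirs (rest, v)
      simp only [List.length_cons] at hm
      set st := pvScan land (land.length : Int) ((land.headD []).length : Int) p pvDirs (rest, v)
        with hst
      have hunf : bfsCells land (land.length : Int) ((land.headD []).length : Int) (p :: rest) v =
          (p :: (bfsCells land (land.length : Int) ((land.headD []).length : Int) st.1 st.2).1,
            (bfsCells land (land.length : Int) ((land.headD []).length : Int) st.1 st.2).2) := by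
        rw [bfsCells]
      have hnewReach : ∀ x ∈ new, OilAt land x ∧ Reach land s x ∧ ¬ Vis v x := by
        intro x hx
        obtain ⟨hd, hO, hvf⟩ := s3 x hx
        refine ⟨hO, Relation.ReflTransGen.tail hRp ⟨hOp, hO, (mem_nbrs_iff p x).mpr hd⟩, ?_⟩
        simp [Vis, hvf]
      have A1 : ∀ x ∈ st.1, OilAt land x ∧ Vis st.2 x ∧ Reach land s x := by
        rw [s1]
        intro x hx
        rcases List.mem_append.mp hx with hx | hx
        · obtain ⟨hO, hV, hR⟩ := hq x (List.mem_cons_of_mem _ hx)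
          exact ⟨hO, s6 x hV, hR⟩
        · obtain ⟨hO, hR, _⟩ := hnewReach x hx
          exact ⟨hO, (s4 x hO.1.1 hO.1.2.2.1).mpr (Or.inr hx), hR⟩
      have A2 : st.1.Nodup := by
        rw [s1]
        refine List.nodup_append.mpr ⟨hnd.of_cons, s2, ?_⟩
        intro x hx y hy hxy
        exact (hnewReach y hy).2.2 (hxy ▸ (hq x (List.mem_cons_of_mem _ hx)).2.1)
      have A3 : ∀ x, InGrid land x → Vis st.2 x → V0 x ∨ (OilAt land x ∧ Reach land s x) := by
        intro x hIG hV
        rcases (s4 x hIG.1 hIG.2.2.1).mp hV with hV | hV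
        · exact h3 x hIG hV
        · exact Or.inr ⟨(hnewReach x hV).1, (hnewReach x hV).2.1⟩
      have A4 : ∀ x, InGrid land x → V0 x → Vis st.2 x := fun x hIG h0 => s6 x (h4 x hIG h0)
      have A5 : ∀ x, InGrid land x → Vis st.2 x → ¬ V0 x → x ∉ st.1 →
          ∀ m ∈ Nbrs x, OilAt land m → Vis st.2 m := by
        intro x hIG hV h0 hqx m hmN hOm
        have hxnew : x ∉ new := fun hc => hqx (s1 ▸ List.mem_append.mpr (Or.inr hc))
        have hVv : Vis v x := by
          rcases (s4 x hIG.1 hIG.2.2.1).mp hV with h | h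
          · exact h
          · exact absurd h hxnew
        by_cases hxp : x = p
        · subst hxp
          obtain ⟨d, hd, he⟩ := (mem_nbrs_iff x m).mp hmN
          exact he ▸ s5 d hd (he ▸ hOm)
        · have hxrest : x ∉ rest := fun hc => hqx (s1 ▸ List.mem_append.mpr (Or.inl hc))
          have := h5 x hIG hVv h0 (by simp [hxp, hxrest]) m hmN hOm
          exact s6 m this
      obtain ⟨c1, c2, c3, c4, c5, c6⟩ := ih st.1 st.2
        (by simp only [] at hms; omega) A1 A2 A3 A4 A5
      rw [hunf]
      have hnewin : ∀ x ∈ new,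
          x ∈ (bfsCells land (land.length : Int) ((land.headD []).length : Int) st.1 st.2).1 := by
        intro x hx
        exact c4 x (s1 ▸ List.mem_append.mpr (Or.inr hx))
      refine ⟨?_, ?_, ?_, ?_, ?_, ?_⟩
      · intro x hIG
        rw [c1 x hIG]
        constructor
        · rintro (hV | hmem)
          · rcases (s4 x hIG.1 hIG.2.2.1).mp hV with h | h
            · exact Or.inl h
            · exact Or.inr (List.mem_cons_of_mem _ (hnewin x h))
          · exact Or.inr (List.mem_cons_of_mem _ hmem)
        · rintro (hV | hmem)
          · exact Or.inl (s6 x hV)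
          · rcases List.mem_cons.mp hmem with rfl | hmem
            · exact Or.inl (s6 x hVp)
            · exact Or.inr hmem
      · refine List.nodup_cons.mpr ⟨?_, c2⟩
        intro hc
        rcases c5 p hc with hc | hc
        · rcases List.mem_append.mp (s1 ▸ hc) with hc | hc
          · exact (List.nodup_cons.mp hnd).1 hc
          · exact (hnewReach p hc).2.2 hVp
        · exact hc (s6 p hVp)
      · intro x hx
        rcases List.mem_cons.mp hx with rfl | hx
        · exact ⟨hOp, hRp⟩
        · exact c3 x hx
      · intro x hx
        rcases List.mem_cons.mp hx with rfl | hx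
        · exact List.mem_cons_self ..
        · exact List.mem_cons_of_mem _ (c4 x (s1 ▸ List.mem_append.mpr (Or.inl hx)))
      · intro x hx
        rcases List.mem_cons.mp hx with rfl | hx
        · exact Or.inl (List.mem_cons_self ..)
        · rcases c5 x hx with hc | hc
          · rcases List.mem_append.mp (s1 ▸ hc) with hc | hc
            · exact Or.inl (List.mem_cons_of_mem _ hc)
            · exact Or.inr (hnewReach x hc).2.2
          · exact Or.inr (fun hv => hc (s6 x hv))
      · exact c6

/-- a fresh seed floods exactly its connected component (A's BFS) -/
lemma bfsCells_flood (land : List (List Int)) (s : Int × Int) (v : List (List Bool))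
    (hs : OilAt land s) (hnv : ¬ Vis v s)
    (hcl : ∀ p, InGrid land p → Vis v p → ∀ m ∈ Nbrs p, OilAt land m → Vis v m) :
    (∀ p, OilAt land p → Reach land s p → ¬ Vis v p) ∧
    (∀ p, p ∈ (bfsCells land (land.length : Int) ((land.headD []).length : Int) [s]
        (pvVisSet v s.1 s.2)).1 ↔ OilAt land p ∧ Reach land s p) ∧
    (bfsCells land (land.length : Int) ((land.headD []).length : Int) [s]
        (pvVisSet v s.1 s.2)).1.Nodup ∧
    (∀ p, InGrid land p →
      (Vis (bfsCells land (land.length : Int) ((land.headD []).length : Int) [s]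
          (pvVisSet v s.1 s.2)).2 p ↔ Vis v p ∨ (OilAt land p ∧ Reach land s p))) := by
  have hdisj : ∀ p, OilAt land p → Reach land s p → ¬ Vis v p := by
    intro p _ hR hv
    exact hnv (vis_propagate land v hcl hv (reach_symm land hR))
  have hvf : pvVisGet v s.1 s.2 = false := by
    cases hvb : pvVisGet v s.1 s.2 with
    | false => rfl
    | true => exact absurd hvb hnv
  have hsx : 0 ≤ s.1 := hs.1.1
  have hsy : 0 ≤ s.2 := hs.1.2.2.1
  have hv1iff : ∀ z : Int × Int, 0 ≤ z.1 → 0 ≤ z.2 →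
      (Vis (pvVisSet v s.1 s.2) z ↔ Vis v z ∨ z = s) := by
    intro z hz1 hz2
    rw [Vis, visGet_visSet_iff v s.1 s.2 hsx hsy hvf z hz1 hz2]
    constructor
    · rintro (h | h)
      · exact Or.inl h
      · exact Or.inr (Prod.ext_iff.mpr ⟨congrArg Prod.fst h, congrArg Prod.snd h⟩)
    · rintro (h | h)
      · exact Or.inl h
      · exact Or.inr (by rw [h])
  have hVs1 : Vis (pvVisSet v s.1 s.2) s := (hv1iff s hsx hsy).mpr (Or.inr rfl)
  obtain ⟨c1, c2, c3, c4, c5, c6⟩ := bfsCells_master land s (fun z => Vis v z)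
    (2 * pvUC (pvVisSet v s.1 s.2) + 1) [s] (pvVisSet v s.1 s.2)
    (by simp)
    (by intro p hp; rw [List.mem_singleton] at hp; subst hp; exact ⟨hs, hVs1, .refl⟩)
    (List.nodup_singleton s)
    (by
      intro p hIG hV
      rcases (hv1iff p hIG.1 hIG.2.2.1).mp hV with h | h
      · exact Or.inl h
      · exact Or.inr ⟨h ▸ hs, h ▸ Relation.ReflTransGen.refl⟩)
    (fun p _ h0 => visSet_mono v s.1 s.2 p h0)
    (by
      intro p hIG hV h0 hq
      rcases (hv1iff p hIG.1 hIG.2.2.1).mp hV with h | h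
      · exact absurd h h0
      · exact absurd (List.mem_singleton.mpr h) hq)
  have hcomp : ∀ p', Reach land s p' → OilAt land p' →
      Vis (bfsCells land (land.length : Int) ((land.headD []).length : Int) [s]
        (pvVisSet v s.1 s.2)).2 p' := by
    intro p' hR'
    induction hR' with
    | refl =>
      intro _
      exact (c1 s hs.1).mpr (Or.inr (c4 s (List.mem_singleton_self s)))
    | tail hab hbc ih =>
      intro _
      have hVa := ih hbc.1
      exact c6 _ hbc.1.1 hVa (hdisj _ hbc.1 (by assumption)) _ hbc.2.2 hbc.2.1
  have hchar : ∀ p, p ∈ (bfsCells land (land.length : Int) ((land.headD []).length : Int) [s]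
      (pvVisSet v s.1 s.2)).1 ↔ OilAt land p ∧ Reach land s p := by
    intro p
    constructor
    · exact c3 p
    · rintro ⟨hO, hR⟩
      rcases (c1 p hO.1).mp (hcomp p hR hO) with hV | hmem
      · rcases (hv1iff p hO.1.1 hO.1.2.2.1).mp hV with h | h
        · exact absurd h (hdisj p hO hR)
        · exact h ▸ c4 s (List.mem_singleton_self s)
      · exact hmem
  refine ⟨hdisj, hchar, c2, ?_⟩
  intro p hIG
  rw [c1 p hIG]
  constructor
  · rintro (hV | hmem)
    · rcases (hv1iff p hIG.1 hIG.2.2.1).mp hV with h | h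
      · exact Or.inl h
      · exact Or.inr ⟨h ▸ hs, h ▸ Relation.ReflTransGen.refl⟩
    · exact Or.inr ((hchar p).mp hmem)
  · rintro (hV | hOR)
    · exact Or.inl (visSet_mono v s.1 s.2 p hV)
    · exact Or.inr ((hchar p).mpr hOR)

/-- A's bfs is the ghost collector, counting instead of collecting -/
lemma bfsA_eq_cells (land : List (List Int)) (h w : Int) :
    ∀ (n : ℕ) (q : List (Int × Int)) (v : List (List Bool)) (c : Int),
      2 * pvUC v + q.length ≤ n →
      bfsA land h w q v c =
        (c + ((bfsCells land h w q v).1.length : Int), (bfsCells land h w q v).2) := by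
  intro n
  induction n with
  | zero =>
    intro q v c hm
    cases q with
    | nil => simp [bfsA, bfsCells]
    | cons p rest => simp at hm
  | succ n ih =>
    intro q v c hm
    cases q with
    | nil => simp [bfsA, bfsCells]
    | cons p rest =>
      rw [bfsA, bfsCells]
      have hms := pvScan_measure land h w p pvDirs (rest, v)
      simp only [List.length_cons] at hm
      rw [ih _ _ (c + 1) (by simp only [] at hms ⊢; omega)]
      simp only [List.length_cons]
      rw [Prod.ext_iff]
      exact ⟨by push_cast; ring, rfl⟩

lemma colOK_unique (land : List (List Int)) (k a b : Int)
    (ha : ColOK land k a) (hb : ColOK land k b) : a = b := by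
  obtain ⟨L1, hn1, hm1, he1⟩ := ha
  obtain ⟨L2, hn2, hm2, he2⟩ := hb
  have : L1.length = L2.length :=
    ((List.perm_ext_iff_of_nodup hn1 hn2).2 (fun x => (hm1 x).trans (hm2 x).symm)).length_eq
  omega

/-- bookkeeping for `result[j] += t` (shared shape of A's `pvAddAt` and B's `creditB`) -/
lemma pvAddAt_getD (xs : List Int) (j : Int) (t : Int) (_hj : 0 ≤ j)
    (hlen : j.toNat < xs.length) :
    (pvAddAt xs j t).length = xs.length ∧
    (pvAddAt xs j t).getD j.toNat 0 = xs.getD j.toNat 0 + t ∧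
    (∀ k : ℕ, k < xs.length → k ≠ j.toNat → (pvAddAt xs j t).getD k 0 = xs.getD k 0) := by
  unfold pvAddAt
  refine ⟨by simp, ?_, ?_⟩
  · generalize xs.getD j.toNat 0 + t = a
    rw [List.getD_eq_getElem _ _ (by simpa using hlen)]
    exact List.getElem_set_self _
  · intro k hk hkj
    rw [List.getD_eq_getElem _ _ (by simpa using hk), List.getD_eq_getElem _ _ hk,
      List.getElem_set_ne (by omega)]

lemma creditB_eq_pvAddAt (xs : List Int) (c t : Int) : creditB xs c t = pvAddAt xs c t := rfl

/-- bookkeeping for B's `for c in cols: best[c] += size` -/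
lemma creditFold_getD (cols : List Int) (hnd : cols.Nodup) (xs : List Int) (size : Int)
    (hc : ∀ c ∈ cols, 0 ≤ c ∧ c.toNat < xs.length) :
    (cols.foldl (fun r c => creditB r c size) xs).length = xs.length ∧
    (∀ k : ℕ, k < xs.length →
      (cols.foldl (fun r c => creditB r c size) xs).getD k 0 =
        xs.getD k 0 + (if (k : Int) ∈ cols then size else 0)) := by
  induction cols generalizing xs with
  | nil => simp
  | cons c cs ih =>
    obtain ⟨hc0, hclt⟩ := hc c (List.mem_cons_self ..)
    obtain ⟨hlen1, hself, hother⟩ := pvAddAt_getD xs c size hc0 hclt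
    have hcs : ∀ c' ∈ cs, 0 ≤ c' ∧ c'.toNat < (creditB xs c size).length := by
      intro c' hc'
      rw [creditB_eq_pvAddAt, hlen1]
      exact hc c' (List.mem_cons_of_mem _ hc')
    obtain ⟨ihlen, ihget⟩ := ih (List.Nodup.of_cons hnd) (creditB xs c size) hcs
    constructor
    · rw [List.foldl_cons, ihlen, creditB_eq_pvAddAt, hlen1]
    · intro k hk
      rw [List.foldl_cons, ihget k (by rw [creditB_eq_pvAddAt, hlen1]; exact hk),
        creditB_eq_pvAddAt]
      by_cases hkc : (k : Int) = c
      · have hkn : k = c.toNat := by omega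
        have hcc : ((c.toNat : ℕ) : Int) = c := by omega
        rw [hkn, hself, hcc]
        have hnotin : c ∉ cs := (List.nodup_cons.mp hnd).1
        simp [hnotin]
      · have hkn : k ≠ c.toNat := by omega
        rw [hother k hk hkn]
        simp [List.mem_cons, hkc]

lemma oil_of_landGet (land : List (List Int)) (x y : Int) (hx : 0 ≤ x) (hy : 0 ≤ y)
    (hyw : y < ((land.headD []).length : Int)) (h : pvLandGet land x y = 1) :
    OilAt land (x, y) := by
  refine ⟨⟨hx, ?_, hy, hyw⟩, h⟩
  by_contra hlen
  unfold pvLandGet at h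
  rw [List.getD_eq_default land [] (by omega)] at h
  simp at h

/-- A's whole column-`j` seed sweep: invariant of the `for i in range(len(land))` fold -/
lemma colA_spec (land : List (List Int)) (j : Int) (hj : 0 ≤ j)
    (hjw : j < ((land.headD []).length : Int)) :
    ∀ (t : ℕ) (result0 : List Int), result0.length = (land.headD []).length →
      ∃ L : List (Int × Int), L.Nodup ∧ (∀ p, p ∈ L ↔ USet land j (t : Int) p) ∧
        (∀ z, InGrid land z →
          (Vis ((PySem.List.pyRange 0 (t : Int) 1).foldl
            (pvStepA land (land.length : Int) ((land.headD []).length : Int) j)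
            (List.replicate land.length (List.replicate (land.headD []).length false),
              result0)).1 z ↔ z ∈ L)) ∧
        ((PySem.List.pyRange 0 (t : Int) 1).foldl
          (pvStepA land (land.length : Int) ((land.headD []).length : Int) j)
          (List.replicate land.length (List.replicate (land.headD []).length false),
            result0)).2.length = result0.length ∧
        ((PySem.List.pyRange 0 (t : Int) 1).foldl
          (pvStepA land (land.length : Int) ((land.headD []).length : Int) j)
          (List.replicate land.length (List.replicate (land.headD []).length false),
            result0)).2.getD j.toNat 0 = result0.getD j.toNat 0 + (L.length : Int) ∧
        (∀ k : ℕ, k < result0.length → k ≠ j.toNat →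
          ((PySem.List.pyRange 0 (t : Int) 1).foldl
            (pvStepA land (land.length : Int) ((land.headD []).length : Int) j)
            (List.replicate land.length (List.replicate (land.headD []).length false),
              result0)).2.getD k 0 = result0.getD k 0) := by
  intro t
  induction t with
  | zero =>
    intro result0 hlen0
    refine ⟨[], List.nodup_nil, ?_, ?_, ?_, ?_, ?_⟩
    · intro p
      simp only [List.not_mem_nil, false_iff]
      rintro ⟨_, x, ⟨hxlt, _⟩, hOx, _⟩
      have := hOx.1.1
      simp at hxlt
      omega
    · intro z hIG
      rw [PySem.List.pyRange_one_eq_nil (by omega)]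
      simp only [List.foldl_nil, List.not_mem_nil, iff_false, Vis]
      intro hc
      rw [visGet_fresh] at hc
      obtain ⟨h1, h2, h3, h4⟩ := hIG
      have hP : decide (z.1.toNat < land.length) = true := decide_eq_true (by omega)
      have hQ : decide (z.2.toNat < (land.headD []).length) = true := decide_eq_true (by omega)
      rw [hP, hQ] at hc
      simp at hc
    · rw [PySem.List.pyRange_one_eq_nil (by omega)]
      rfl
    · rw [PySem.List.pyRange_one_eq_nil (by omega)]; simp
    · rw [PySem.List.pyRange_one_eq_nil (by omega)]
      intro k _ _
      rfl
  | succ t ih =>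
    intro result0 hlen0
    obtain ⟨L, ihnd, ihchar, ihvis, ihlen, ihj, ihk⟩ := ih result0 hlen0
    have hsplit : PySem.List.pyRange 0 ((t : Int) + 1) 1 =
        PySem.List.pyRange 0 (t : Int) 1 ++ [(t : Int)] :=
      PySem.List.pyRange_one_succ_right (by omega)
    have hcast : ((t + 1 : ℕ) : Int) = (t : Int) + 1 := by push_cast; ring
    rw [hcast, hsplit, List.foldl_append, List.foldl_cons, List.foldl_nil]
    set st := (PySem.List.pyRange 0 (t : Int) 1).foldl
      (pvStepA land (land.length : Int) ((land.headD []).length : Int) j)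
      (List.replicate land.length (List.replicate (land.headD []).length false), result0)
      with hst
    have hS' : ∀ x : Int × Int, (x.1 < (t : Int) + 1 ∧ x.2 = j) ↔
        ((x.1 < (t : Int) ∧ x.2 = j) ∨ x = ((t : Int), j)) := by
      intro x
      rw [Prod.ext_iff]
      constructor
      · rintro ⟨h1, h2⟩
        by_cases hx : x.1 = (t : Int)
        · exact Or.inr ⟨hx, h2⟩
        · exact Or.inl ⟨by omega, h2⟩
      · rintro (⟨h1, h2⟩ | ⟨h1, h2⟩) <;> constructor <;> omega
    by_cases hg : pvLandGet land (t : Int) j = 1 ∧ pvVisGet st.1 (t : Int) j = false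
    · obtain ⟨hland, hfresh⟩ := hg
      have hOs : OilAt land ((t : Int), j) := oil_of_landGet land _ j (by omega) hj hjw hland
      have hnv : ¬ Vis st.1 ((t : Int), j) := by simp [Vis, hfresh]
      have hcl : ∀ p, InGrid land p → Vis st.1 p → ∀ m ∈ Nbrs p, OilAt land m →
          Vis st.1 m := by
        intro z hIG hV m hmN hOm
        have hz := (ihchar z).mp ((ihvis z hIG).mp hV)
        have hm := fset_closed land _ z hz m hmN hOm
        exact (ihvis m hOm.1).mpr ((ihchar m).mpr hm)
      obtain ⟨hdisj, hcellchar, hcellnd, hvischar⟩ :=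
        bfsCells_flood land ((t : Int), j) st.1 hOs hnv hcl
      have hbfsa := bfsA_eq_cells land (land.length : Int) ((land.headD []).length : Int)
        (2 * pvUC (pvVisSet st.1 (t : Int) j) + 1) [((t : Int), j)]
        (pvVisSet st.1 (t : Int) j) 0 (by simp)
      have hstep : pvStepA land (land.length : Int) ((land.headD []).length : Int) j st (t : Int) =
          ((bfsCells land (land.length : Int) ((land.headD []).length : Int) [((t : Int), j)]
              (pvVisSet st.1 (t : Int) j)).2,
            pvAddAt st.2 j
              ((bfsCells land (land.length : Int) ((land.headD []).length : Int) [((t : Int), j)]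
                (pvVisSet st.1 (t : Int) j)).1.length : Int)) := by
        rw [pvStepA, if_pos ⟨hland, hfresh⟩]
        simp only [hbfsa, zero_add]
      rw [hstep]
      set cs := (bfsCells land (land.length : Int) ((land.headD []).length : Int) [((t : Int), j)]
        (pvVisSet st.1 (t : Int) j)).1 with hcs
      have hLdisj : ∀ x ∈ cs, x ∉ L := by
        intro x hx hxL
        have hor := (hcellchar x).mp hx
        exact hdisj x hor.1 hor.2 ((ihvis x hor.1.1).mpr hxL)
      refine ⟨L ++ cs, ?_, ?_, ?_, ?_, ?_, ?_⟩
      · refine List.nodup_append.mpr ⟨ihnd, hcellnd, ?_⟩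
        intro a ha b hb hab
        exact hLdisj b hb (hab ▸ ha)
      · intro p
        rw [List.mem_append, USet, fset_add_seed land _ _ ((t : Int), j) hS' hOs p]
        constructor
        · rintro (h | h)
          · exact Or.inl ((ihchar p).mp h)
          · exact Or.inr ((hcellchar p).mp h)
        · rintro (h | h)
          · exact Or.inl ((ihchar p).mpr h)
          · exact Or.inr ((hcellchar p).mpr h)
      · intro z hIG
        constructor
        · intro h
          rcases (hvischar z hIG).mp h with h | h
          · exact List.mem_append.mpr (Or.inl ((ihvis z hIG).mp h))
          · exact List.mem_append.mpr (Or.inr ((hcellchar z).mpr h))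
        · intro h
          refine (hvischar z hIG).mpr ?_
          rcases List.mem_append.mp h with h | h
          · exact Or.inl ((ihvis z hIG).mpr h)
          · exact Or.inr ((hcellchar z).mp h)
      · show (pvAddAt st.2 j (cs.length : Int)).length = result0.length
        have := (pvAddAt_getD st.2 j (cs.length : Int) hj (by omega)).1
        omega
      · show (pvAddAt st.2 j (cs.length : Int)).getD j.toNat 0 =
          result0.getD j.toNat 0 + ((L ++ cs).length : Int)
        rw [(pvAddAt_getD st.2 j (cs.length : Int) hj (by omega)).2.1, ihj]
        push_cast [List.length_append]
        ring
      · intro k hk hkj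
        show (pvAddAt st.2 j (cs.length : Int)).getD k 0 = result0.getD k 0
        rw [(pvAddAt_getD st.2 j (cs.length : Int) hj (by omega)).2.2 k (by omega) hkj]
        exact ihk k hk hkj
    · have hstep : pvStepA land (land.length : Int) ((land.headD []).length : Int) j st (t : Int) =
          st := by
        rw [pvStepA, if_neg hg]
      rw [hstep]
      have habsorb : ∀ p, USet land j ((t : Int) + 1) p ↔ USet land j (t : Int) p := by
        intro p
        by_cases hland : pvLandGet land (t : Int) j = 1
        · have hOs : OilAt land ((t : Int), j) := oil_of_landGet land _ j (by omega) hj hjw hland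
          have hvis : pvVisGet st.1 (t : Int) j = true := by
            rcases Bool.eq_false_or_eq_true (pvVisGet st.1 (t : Int) j) with h | h
            · exact h
            · exact absurd ⟨hland, h⟩ hg
          have hmem : FSet land (fun s => s.1 < (t : Int) ∧ s.2 = j) ((t : Int), j) :=
            (ihchar _).mp ((ihvis _ hOs.1).mp hvis)
          exact fset_dup_seed land _ _ ((t : Int), j) hS' hmem p
        · exact fset_dead_seed land _ _ ((t : Int), j) hS'
            (fun hO => hland hO.2) p
      exact ⟨L, ihnd, fun p => (ihchar p).trans (habsorb p).symm, ihvis, ihlen, ihj, ihk⟩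

lemma fset_congr_seeds (land : List (List Int)) (S S' : Int × Int → Prop)
    (h : ∀ x, OilAt land x → (S x ↔ S' x)) (p : Int × Int) :
    FSet land S p ↔ FSet land S' p := by
  constructor
  · rintro ⟨hO, x, hS, hOx, hR⟩
    exact ⟨hO, x, (h x hOx).mp hS, hOx, hR⟩
  · rintro ⟨hO, x, hS, hOx, hR⟩
    exact ⟨hO, x, (h x hOx).mpr hS, hOx, hR⟩

/-! B-side proofs: the explicit-stack DFS over the visited set. -/

/-- B-side ghost: the DFS loop collecting the popped cells -/
def dfsCellsB (land : List (List Int)) (h w : Int) :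
    List (Int × Int) → PySem.Set (Int × Int) → List (Int × Int) × PySem.Set (Int × Int)
  | [], seen => ([], seen)
  | p :: rest, seen =>
    let st := (nbrsB p.1 p.2).foldl (pushB land h w) (rest, seen)
    let r := dfsCellsB land h w st.1 st.2
    (p :: r.1, r.2)
termination_by stack seen => 2 * pvUnseen h w seen + stack.length
decreasing_by
  have hm := pushB_measure land h w (nbrsB p.1 p.2) (rest, seen)
  simp only [List.length_cons] at hm ⊢
  omega

/-- B's dfs is the ghost collector: size counts the pops, cols collects their columns -/
lemma dfsB_eq_cells (land : List (List Int)) (h w : Int) :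
    ∀ (n : ℕ) (q : List (Int × Int)) (v : PySem.Set (Int × Int)) (size : Int)
      (cols : PySem.Set Int),
      2 * pvUnseen h w v + q.length ≤ n →
      dfsB land h w q v size cols =
        (size + ((dfsCellsB land h w q v).1.length : Int),
         (dfsCellsB land h w q v).1.foldl (fun cs p => PySem.Set.add cs p.2) cols,
         (dfsCellsB land h w q v).2) := by
  intro n
  induction n with
  | zero =>
    intro q v size cols hm
    cases q with
    | nil => simp [dfsB, dfsCellsB]
    | cons p rest => simp at hm
  | succ n ih =>
    intro q v size cols hm
    cases q with
    | nil => simp [dfsB, dfsCellsB]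
    | cons p rest =>
      rw [dfsB, dfsCellsB]
      have hms := pushB_measure land h w (nbrsB p.1 p.2) (rest, v)
      simp only [List.length_cons] at hm
      rw [ih _ _ (size + 1) (PySem.Set.add cols p.2) (by simp only [] at hms ⊢; omega)]
      simp only [List.length_cons, List.foldl_cons]
      rw [Prod.ext_iff]
      exact ⟨by push_cast; ring, rfl⟩

lemma mem_nbrsB (p n : Int × Int) : n ∈ nbrsB p.1 p.2 ↔ n ∈ Nbrs p := by
  simp only [nbrsB, Nbrs, pvDirs, List.map_cons, List.map_nil, List.mem_cons,
    List.not_mem_nil, or_false, Prod.ext_iff]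
  omega

lemma pushB_guard_iff (land : List (List Int)) (v : PySem.Set (Int × Int)) (d : Int × Int) :
    (0 ≤ d.1 ∧ d.1 < (land.length : Int) ∧ 0 ≤ d.2 ∧ d.2 < ((land.headD []).length : Int) ∧
      cellB land d = 1 ∧ ¬ d ∈ v) ↔ (OilAt land d ∧ d ∉ v) := by
  unfold OilAt InGrid cellB pvLandGet
  tauto

/-- what one DFS neighbour scan (`pushB` fold) does -/
lemma pushB_spec (land : List (List Int)) (ds : List (Int × Int))
    (q : List (Int × Int)) (v : PySem.Set (Int × Int)) :
    ∃ new : List (Int × Int),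
      (ds.foldl (pushB land (land.length : Int) ((land.headD []).length : Int)) (q, v)).1 =
        new ++ q ∧
      new.Nodup ∧
      (∀ n ∈ new, n ∈ ds ∧ OilAt land n ∧ n ∉ v) ∧
      (∀ z, z ∈ (ds.foldl (pushB land (land.length : Int) ((land.headD []).length : Int))
        (q, v)).2 ↔ z ∈ v ∨ z ∈ new) ∧
      (∀ n ∈ ds, OilAt land n →
        n ∈ (ds.foldl (pushB land (land.length : Int) ((land.headD []).length : Int)) (q, v)).2) := by
  induction ds generalizing q v with
  | nil =>
    refine ⟨[], by simp, List.nodup_nil, by simp, by simp, by simp⟩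
  | cons d t ih =>
    simp only [List.foldl_cons]
    by_cases hg : OilAt land d ∧ d ∉ v
    · have hstep : pushB land (land.length : Int) ((land.headD []).length : Int) (q, v) d =
          (d :: q, PySem.Set.add v d) := by
        unfold pushB
        rw [if_pos ((pushB_guard_iff land v d).mpr hg)]
      rw [hstep]
      obtain ⟨new', h1, h2, h3, h4, h5⟩ := ih (d :: q) (PySem.Set.add v d)
      have hmemadd : ∀ z : Int × Int, z ∈ PySem.Set.add v d ↔ z ∈ v ∨ z = d :=
        fun z => PySem.Set.mem_add v d z
      refine ⟨new' ++ [d], ?_, ?_, ?_, ?_, ?_⟩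
      · rw [h1]
        simp
      · refine List.nodup_append.mpr ⟨h2, List.nodup_singleton d, ?_⟩
        intro x hx y hy hxy
        rw [List.mem_singleton] at hy
        subst hy
        subst hxy
        exact (h3 x hx).2.2 ((hmemadd x).mpr (Or.inr rfl))
      · intro n hn
        rcases List.mem_append.mp hn with hn | hn
        · obtain ⟨hd', hO', hv'⟩ := h3 n hn
          exact ⟨List.mem_cons_of_mem _ hd', hO', fun hc => hv' ((hmemadd n).mpr (Or.inl hc))⟩
        · rw [List.mem_singleton] at hn
          subst hn
          exact ⟨List.mem_cons_self .., hg.1, hg.2⟩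
      · intro z
        rw [h4 z, hmemadd z, List.mem_append, List.mem_singleton]
        tauto
      · intro n hn hOn
        rcases List.mem_cons.mp hn with rfl | hn
        · exact (h4 n).mpr (Or.inl ((hmemadd n).mpr (Or.inr rfl)))
        · exact h5 n hn hOn
    · have hstep : pushB land (land.length : Int) ((land.headD []).length : Int) (q, v) d =
          (q, v) := by
        unfold pushB
        rw [if_neg (fun hc => hg ((pushB_guard_iff land v d).mp hc))]
      rw [hstep]
      obtain ⟨new', h1, h2, h3, h4, h5⟩ := ih q v
      refine ⟨new', h1, h2, ?_, h4, ?_⟩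
      · intro n hn
        obtain ⟨hd', hO', hv'⟩ := h3 n hn
        exact ⟨List.mem_cons_of_mem _ hd', hO', hv'⟩
      · intro n hn hOn
        rcases List.mem_cons.mp hn with rfl | hn
        · have hin : n ∈ v := by
            by_contra hc
            exact hg ⟨hOn, hc⟩
          exact (h4 n).mpr (Or.inl hin)
        · exact h5 n hn hOn

lemma seenB_propagate (land : List (List Int)) (v : PySem.Set (Int × Int))
    (hcl : ∀ p, p ∈ v → ∀ m ∈ Nbrs p, OilAt land m → m ∈ v)
    {p q : Int × Int} (hp : p ∈ v) (h : Reach land p q) : q ∈ v := by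
  induction h with
  | refl => exact hp
  | tail _ hstep ih => exact hcl _ ih _ hstep.2.2 hstep.2.1

/-- the stack invariant of B's DFS loop, by strong induction on the termination measure -/
lemma dfsCellsB_master (land : List (List Int)) (s : Int × Int) (V0 : Int × Int → Prop) :
    ∀ (n : ℕ) (q : List (Int × Int)) (v : PySem.Set (Int × Int)),
      2 * pvUnseen (land.length : Int) ((land.headD []).length : Int) v + q.length ≤ n →
      (∀ p ∈ q, OilAt land p ∧ p ∈ v ∧ Reach land s p) →
      q.Nodup →
      (∀ p, p ∈ v → V0 p ∨ (OilAt land p ∧ Reach land s p)) →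
      (∀ p, V0 p → p ∈ v) →
      (∀ p, p ∈ v → ¬ V0 p → p ∉ q → ∀ m ∈ Nbrs p, OilAt land m → m ∈ v) →
      (∀ p, p ∈ (dfsCellsB land (land.length : Int) ((land.headD []).length : Int) q v).2 ↔
        p ∈ v ∨ p ∈ (dfsCellsB land (land.length : Int) ((land.headD []).length : Int) q v).1) ∧
      (dfsCellsB land (land.length : Int) ((land.headD []).length : Int) q v).1.Nodup ∧
      (∀ p ∈ (dfsCellsB land (land.length : Int) ((land.headD []).length : Int) q v).1,
        OilAt land p ∧ Reach land s p) ∧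
      (∀ p ∈ q, p ∈ (dfsCellsB land (land.length : Int) ((land.headD []).length : Int) q v).1) ∧
      (∀ p ∈ (dfsCellsB land (land.length : Int) ((land.headD []).length : Int) q v).1,
        p ∈ q ∨ p ∉ v) ∧
      (∀ p, p ∈ (dfsCellsB land (land.length : Int) ((land.headD []).length : Int) q v).2 →
        ¬ V0 p → ∀ m ∈ Nbrs p, OilAt land m →
          m ∈ (dfsCellsB land (land.length : Int) ((land.headD []).length : Int) q v).2) := by
  intro n
  induction n with
  | zero =>
    intro q v hm hq hnd h3 h4 h5
    cases q with
    | nil =>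
      refine ⟨by intro p; simp [dfsCellsB], by simp [dfsCellsB], by simp [dfsCellsB], by simp,
        by simp [dfsCellsB], ?_⟩
      intro p hp hV0 m hm' hO
      have := h5 p (by simpa [dfsCellsB] using hp) hV0 (by simp) m hm' hO
      simpa [dfsCellsB] using this
    | cons p rest => simp at hm
  | succ n ih =>
    intro q v hm hq hnd h3 h4 h5
    cases q with
    | nil =>
      refine ⟨by intro p; simp [dfsCellsB], by simp [dfsCellsB], by simp [dfsCellsB], by simp,
        by simp [dfsCellsB], ?_⟩
      intro p hp hV0 m hm' hO
      have := h5 p (by simpa [dfsCellsB] using hp) hV0 (by simp) m hm' hO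
      simpa [dfsCellsB] using this
    | cons p rest =>
      obtain ⟨hOp, hVp, hRp⟩ := hq p (List.mem_cons_self ..)
      obtain ⟨new, s1, s2, s3, s4, s5⟩ := pushB_spec land (nbrsB p.1 p.2) rest v
      have hms := pushB_measure land (land.length : Int) ((land.headD []).length : Int)
        (nbrsB p.1 p.2) (rest, v)
      simp only [List.length_cons] at hm
      set st := (nbrsB p.1 p.2).foldl
        (pushB land (land.length : Int) ((land.headD []).length : Int)) (rest, v) with hst
      have hunf : dfsCellsB land (land.length : Int) ((land.headD []).length : Int)
          (p :: rest) v =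
          (p :: (dfsCellsB land (land.length : Int) ((land.headD []).length : Int) st.1 st.2).1,
            (dfsCellsB land (land.length : Int) ((land.headD []).length : Int) st.1 st.2).2) := by
        rw [dfsCellsB]
      have hnewReach : ∀ x ∈ new, OilAt land x ∧ Reach land s x ∧ x ∉ v := by
        intro x hx
        obtain ⟨hd, hO, hvf⟩ := s3 x hx
        exact ⟨hO, Relation.ReflTransGen.tail hRp ⟨hOp, hO, (mem_nbrsB p x).mp hd⟩, hvf⟩
      have A1 : ∀ x ∈ st.1, OilAt land x ∧ x ∈ st.2 ∧ Reach land s x := by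
        rw [s1]
        intro x hx
        rcases List.mem_append.mp hx with hx | hx
        · obtain ⟨hO, hR, _⟩ := hnewReach x hx
          exact ⟨hO, (s4 x).mpr (Or.inr hx), hR⟩
        · obtain ⟨hO, hV, hR⟩ := hq x (List.mem_cons_of_mem _ hx)
          exact ⟨hO, (s4 x).mpr (Or.inl hV), hR⟩
      have A2 : st.1.Nodup := by
        rw [s1]
        refine List.nodup_append.mpr ⟨s2, hnd.of_cons, ?_⟩
        intro x hx y hy hxy
        exact (hnewReach x hx).2.2 (hxy ▸ (hq y (List.mem_cons_of_mem _ hy)).2.1)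
      have A3 : ∀ x, x ∈ st.2 → V0 x ∨ (OilAt land x ∧ Reach land s x) := by
        intro x hV
        rcases (s4 x).mp hV with hV | hV
        · exact h3 x hV
        · exact Or.inr ⟨(hnewReach x hV).1, (hnewReach x hV).2.1⟩
      have A4 : ∀ x, V0 x → x ∈ st.2 := fun x h0 => (s4 x).mpr (Or.inl (h4 x h0))
      have A5 : ∀ x, x ∈ st.2 → ¬ V0 x → x ∉ st.1 →
          ∀ m ∈ Nbrs x, OilAt land m → m ∈ st.2 := by
        intro x hV h0 hqx m hmN hOm
        have hxnew : x ∉ new := fun hc => hqx (s1 ▸ List.mem_append.mpr (Or.inl hc))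
        have hVv : x ∈ v := by
          rcases (s4 x).mp hV with h | h
          · exact h
          · exact absurd h hxnew
        by_cases hxp : x = p
        · subst hxp
          exact s5 m ((mem_nbrsB x m).mpr hmN) hOm
        · have hxrest : x ∉ rest := fun hc => hqx (s1 ▸ List.mem_append.mpr (Or.inr hc))
          have := h5 x hVv h0 (by simp [hxp, hxrest]) m hmN hOm
          exact (s4 m).mpr (Or.inl this)
      obtain ⟨c1, c2, c3, c4, c5, c6⟩ := ih st.1 st.2
        (by simp only [] at hms; omega) A1 A2 A3 A4 A5
      rw [hunf]
      have hnewin : ∀ x ∈ new, x ∈ (dfsCellsB land (land.length : Int)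
          ((land.headD []).length : Int) st.1 st.2).1 := by
        intro x hx
        exact c4 x (s1 ▸ List.mem_append.mpr (Or.inl hx))
      refine ⟨?_, ?_, ?_, ?_, ?_, ?_⟩
      · intro x
        rw [c1 x]
        constructor
        · rintro (hV | hmem)
          · rcases (s4 x).mp hV with h | h
            · exact Or.inl h
            · exact Or.inr (List.mem_cons_of_mem _ (hnewin x h))
          · exact Or.inr (List.mem_cons_of_mem _ hmem)
        · rintro (hV | hmem)
          · exact Or.inl ((s4 x).mpr (Or.inl hV))
          · rcases List.mem_cons.mp hmem with rfl | hmem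
            · exact Or.inl ((s4 x).mpr (Or.inl hVp))
            · exact Or.inr hmem
      · refine List.nodup_cons.mpr ⟨?_, c2⟩
        intro hc
        rcases c5 p hc with hc | hc
        · rcases List.mem_append.mp (s1 ▸ hc) with hc | hc
          · exact (hnewReach p hc).2.2 hVp
          · exact (List.nodup_cons.mp hnd).1 hc
        · exact hc ((s4 p).mpr (Or.inl hVp))
      · intro x hx
        rcases List.mem_cons.mp hx with rfl | hx
        · exact ⟨hOp, hRp⟩
        · exact c3 x hx
      · intro x hx
        rcases List.mem_cons.mp hx with rfl | hx
        · exact List.mem_cons_self ..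
        · exact List.mem_cons_of_mem _ (c4 x (s1 ▸ List.mem_append.mpr (Or.inr hx)))
      · intro x hx
        rcases List.mem_cons.mp hx with rfl | hx
        · exact Or.inl (List.mem_cons_self ..)
        · rcases c5 x hx with hc | hc
          · rcases List.mem_append.mp (s1 ▸ hc) with hc | hc
            · exact Or.inr (hnewReach x hc).2.2
            · exact Or.inl (List.mem_cons_of_mem _ hc)
          · exact Or.inr (fun hv => hc ((s4 x).mpr (Or.inl hv)))
      · exact c6

/-- a fresh seed floods exactly its connected component (B's DFS) -/
lemma dfsCellsB_flood (land : List (List Int)) (s : Int × Int) (v : PySem.Set (Int × Int))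
    (hs : OilAt land s) (hnv : s ∉ v)
    (hcl : ∀ p, p ∈ v → ∀ m ∈ Nbrs p, OilAt land m → m ∈ v) :
    (∀ p, OilAt land p → Reach land s p → p ∉ v) ∧
    (∀ p, p ∈ (dfsCellsB land (land.length : Int) ((land.headD []).length : Int) [s]
        (PySem.Set.add v s)).1 ↔ OilAt land p ∧ Reach land s p) ∧
    (dfsCellsB land (land.length : Int) ((land.headD []).length : Int) [s]
        (PySem.Set.add v s)).1.Nodup ∧
    (∀ p, p ∈ (dfsCellsB land (land.length : Int) ((land.headD []).length : Int) [s]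
        (PySem.Set.add v s)).2 ↔ p ∈ v ∨ (OilAt land p ∧ Reach land s p)) := by
  have hdisj : ∀ p, OilAt land p → Reach land s p → p ∉ v := by
    intro p _ hR hv
    exact hnv (seenB_propagate land v hcl hv (reach_symm land hR))
  have hv1iff : ∀ z : Int × Int, z ∈ PySem.Set.add v s ↔ z ∈ v ∨ z = s :=
    fun z => PySem.Set.mem_add v s z
  obtain ⟨c1, c2, c3, c4, c5, c6⟩ := dfsCellsB_master land s (fun z => z ∈ v)
    (2 * pvUnseen (land.length : Int) ((land.headD []).length : Int) (PySem.Set.add v s) + 1)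
    [s] (PySem.Set.add v s)
    (by simp)
    (by
      intro p hp
      rw [List.mem_singleton] at hp
      rw [hp]
      exact ⟨hs, (hv1iff s).mpr (Or.inr rfl), .refl⟩)
    (List.nodup_singleton s)
    (by
      intro p hV
      rcases (hv1iff p).mp hV with h | h
      · exact Or.inl h
      · exact Or.inr ⟨h ▸ hs, h ▸ Relation.ReflTransGen.refl⟩)
    (fun p h0 => (hv1iff p).mpr (Or.inl h0))
    (by
      intro p hV h0 hq
      rcases (hv1iff p).mp hV with h | h
      · exact absurd h h0
      · exact absurd (List.mem_singleton.mpr h) hq)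
  have hcomp : ∀ p', Reach land s p' → OilAt land p' →
      p' ∈ (dfsCellsB land (land.length : Int) ((land.headD []).length : Int) [s]
        (PySem.Set.add v s)).2 := by
    intro p' hR'
    induction hR' with
    | refl =>
      intro _
      exact (c1 s).mpr (Or.inr (c4 s (List.mem_singleton_self s)))
    | tail hab hbc ih =>
      intro _
      have hVa := ih hbc.1
      exact c6 _ hVa (hdisj _ hbc.1 (by assumption)) _ hbc.2.2 hbc.2.1
  have hchar : ∀ p, p ∈ (dfsCellsB land (land.length : Int) ((land.headD []).length : Int) [s]
      (PySem.Set.add v s)).1 ↔ OilAt land p ∧ Reach land s p := by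
    intro p
    constructor
    · exact c3 p
    · rintro ⟨hO, hR⟩
      rcases (c1 p).mp (hcomp p hR hO) with hV | hmem
      · rcases (hv1iff p).mp hV with h | h
        · exact absurd h (hdisj p hO hR)
        · exact h ▸ c4 s (List.mem_singleton_self s)
      · exact hmem
  refine ⟨hdisj, hchar, c2, ?_⟩
  intro p
  rw [c1 p, hv1iff p]
  constructor
  · rintro ((hV | rfl) | hmem)
    · exact Or.inl hV
    · exact Or.inr ⟨hs, Relation.ReflTransGen.refl⟩
    · exact Or.inr ((hchar p).mp hmem)
  · rintro (hV | hOR)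
    · exact Or.inl (Or.inl hV)
    · exact Or.inr ((hchar p).mpr hOR)

lemma nodup_foldl_addCol (l : List (Int × Int)) (s : List Int) (hs : s.Nodup) :
    (l.foldl (fun cs p => PySem.Set.add cs p.2) s).Nodup := by
  induction l generalizing s with
  | nil => exact hs
  | cons a t ih => exact ih _ (PySem.Set.nodup_add _ _ hs)

lemma mem_foldl_addCol (l : List (Int × Int)) (s : List Int) (y : Int) :
    y ∈ l.foldl (fun cs p => PySem.Set.add cs p.2) s ↔ y ∈ s ∨ ∃ p ∈ l, p.2 = y := by
  induction l generalizing s with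
  | nil => simp
  | cons a t ih =>
    simp only [List.foldl_cons, ih, List.mem_cons]
    have : y ∈ PySem.Set.add s a.2 ↔ y ∈ s ∨ y = a.2 := PySem.Set.mem_add s a.2 y
    rw [this]
    constructor
    · rintro ((h | h) | ⟨p, hp, he⟩)
      · exact Or.inl h
      · exact Or.inr ⟨a, Or.inl rfl, h.symm⟩
      · exact Or.inr ⟨p, Or.inr hp, he⟩
    · rintro (h | ⟨p, hp | hp, he⟩)
      · exact Or.inl (Or.inl h)
      · exact Or.inl (Or.inr (hp ▸ he.symm))
      · exact Or.inr ⟨p, hp, he⟩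

/-- one B visit preserves `InvB`, advancing the column pointer -/
lemma visitB_spec (land : List (List Int)) (i j : Int) (hi : 0 ≤ i) (hj : 0 ≤ j)
    (hjw : j < ((land.headD []).length : Int)) (st : PySem.Set (Int × Int) × List Int)
    (hInv : InvB land i j st) :
    InvB land i (j + 1)
      (visitB land (land.length : Int) ((land.headD []).length : Int) i st j) := by
  obtain ⟨hseen, hlen, hcolsInv⟩ := hInv
  have hS' : ∀ x : Int × Int, (x.1 < i ∨ (x.1 = i ∧ x.2 < j + 1)) ↔
      ((x.1 < i ∨ (x.1 = i ∧ x.2 < j)) ∨ x = (i, j)) := by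
    intro x
    rw [Prod.ext_iff]
    omega
  by_cases hg : cellB land (i, j) = 1 ∧ ¬ (i, j) ∈ st.1
  · obtain ⟨hland, hfresh⟩ := hg
    have hOs : OilAt land (i, j) := oil_of_landGet land i j hi hj hjw hland
    have hcl : ∀ p, p ∈ st.1 → ∀ m ∈ Nbrs p, OilAt land m → m ∈ st.1 := by
      intro z hV m hmN hOm
      exact (hseen m).mpr (fset_closed land _ z ((hseen z).mp hV) m hmN hOm)
    obtain ⟨hdisj, hcellchar, hcellnd, hsnchar⟩ :=
      dfsCellsB_flood land (i, j) st.1 hOs hfresh hcl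
    have hdfs := dfsB_eq_cells land (land.length : Int) ((land.headD []).length : Int)
      (2 * pvUnseen (land.length : Int) ((land.headD []).length : Int)
        (PySem.Set.add st.1 (i, j)) + 1) [(i, j)] (PySem.Set.add st.1 (i, j)) 0
      PySem.Set.empty (by simp)
    set cs := (dfsCellsB land (land.length : Int) ((land.headD []).length : Int) [(i, j)]
      (PySem.Set.add st.1 (i, j))).1 with hcs
    have hstep : visitB land (land.length : Int) ((land.headD []).length : Int) i st j =
        ((dfsCellsB land (land.length : Int) ((land.headD []).length : Int) [(i, j)]
            (PySem.Set.add st.1 (i, j))).2,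
          (cs.foldl (fun c p => PySem.Set.add c p.2) PySem.Set.empty).foldl
            (fun best c => creditB best c (cs.length : Int)) st.2) := by
      rw [visitB, if_pos ⟨hland, hfresh⟩]
      simp only [hdfs, zero_add]
    rw [hstep]
    set cols : List Int := cs.foldl (fun c p => PySem.Set.add c p.2) PySem.Set.empty with hcols
    have hcolsmem : ∀ c, c ∈ cols ↔ ∃ x ∈ cs, x.2 = c := by
      intro c
      rw [hcols, mem_foldl_addCol]
      simp [PySem.Set.empty]
    have hcolsnd : cols.Nodup := nodup_foldl_addCol cs PySem.Set.empty List.nodup_nil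
    have hcolsbound : ∀ c ∈ cols, 0 ≤ c ∧ c.toNat < st.2.length := by
      intro c hc
      obtain ⟨x, hx, he⟩ := (hcolsmem c).mp hc
      have hO := ((hcellchar x).mp hx).1
      have h1 := hO.1.2.2.1
      have h2 := hO.1.2.2.2
      constructor
      · omega
      · rw [hlen]; omega
    obtain ⟨hflen, hfget⟩ := creditFold_getD cols hcolsnd st.2 (cs.length : Int) hcolsbound
    have hLdisj : ∀ x ∈ cs, x ∉ st.1 := by
      intro x hx
      have hor := (hcellchar x).mp hx
      exact hdisj x hor.1 hor.2
    refine ⟨?_, ?_, ?_⟩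
    · intro p
      rw [hsnchar p, BSet, fset_add_seed land _ _ (i, j) hS' hOs p]
      constructor
      · rintro (h | h)
        · exact Or.inl ((hseen p).mp h)
        · exact Or.inr h
      · rintro (h | h)
        · exact Or.inl ((hseen p).mpr h)
        · exact Or.inr h
    · show (cols.foldl (fun best c => creditB best c (cs.length : Int)) st.2).length =
        (land.headD []).length
      rw [hflen, hlen]
    · intro k hk
      obtain ⟨Lk, hknd, hkchar, hkget⟩ := hcolsInv k hk
      refine ⟨Lk ++ (if (k : Int) ∈ cols then cs else []), ?_, ?_, ?_⟩
      · by_cases hkc : (k : Int) ∈ cols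
        · rw [if_pos hkc]
          refine List.nodup_append.mpr ⟨hknd, hcellnd, ?_⟩
          intro a ha b hb hab
          have hBa := ((hkchar a).mp ha).1
          exact hLdisj b hb ((hseen b).mpr (hab ▸ hBa))
        · rw [if_neg hkc]
          simpa using hknd
      · intro p
        rw [List.mem_append]
        have hcomp_rk : ∀ p', OilAt land p' → Reach land (i, j) p' →
            (RSet land (k : Int) p' ↔ (k : Int) ∈ cols) := by
          intro p' hO' hR'
          constructor
          · rintro ⟨_, c0, hc0k, hOc0, hRc0⟩
            have hRc0' : Reach land (i, j) c0 := hR'.trans (reach_symm land hRc0)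
            exact (hcolsmem _).mpr ⟨c0, (hcellchar c0).mpr ⟨hOc0, hRc0'⟩, hc0k⟩
          · intro hk'
            obtain ⟨x, hx, he⟩ := (hcolsmem _).mp hk'
            obtain ⟨hOx, hRx⟩ := (hcellchar x).mp hx
            exact ⟨hO', x, he, hOx, (reach_symm land hRx).trans hR'⟩
        constructor
        · rintro (h | h)
          · obtain ⟨hB, hR⟩ := (hkchar p).mp h
            exact ⟨(fset_add_seed land _ _ (i, j) hS' hOs p).mpr (Or.inl hB), hR⟩
          · by_cases hkc : (k : Int) ∈ cols
            · rw [if_pos hkc] at h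
              obtain ⟨hOp, hRp⟩ := (hcellchar p).mp h
              exact ⟨(fset_add_seed land _ _ (i, j) hS' hOs p).mpr (Or.inr ⟨hOp, hRp⟩),
                (hcomp_rk p hOp hRp).mpr hkc⟩
            · rw [if_neg hkc] at h
              simp at h
        · rintro ⟨hB, hR⟩
          rcases (fset_add_seed land _ _ (i, j) hS' hOs p).mp hB with h | h
          · exact Or.inl ((hkchar p).mpr ⟨h, hR⟩)
          · have hkc : (k : Int) ∈ cols := (hcomp_rk p h.1 h.2).mp hR
            rw [if_pos hkc]
            exact Or.inr ((hcellchar p).mpr h)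
      · show (cols.foldl (fun best c => creditB best c (cs.length : Int)) st.2).getD k 0 = _
        rw [hfget k (by rw [hlen]; exact hk), hkget]
        by_cases hkc : (k : Int) ∈ cols
        · rw [if_pos hkc, if_pos hkc]
          push_cast [List.length_append]
          ring
        · rw [if_neg hkc, if_neg hkc]
          simp
  · have hstep : visitB land (land.length : Int) ((land.headD []).length : Int) i st j = st := by
      rw [visitB, if_neg hg]
    rw [hstep]
    have habsorb : ∀ p, BSet land i (j + 1) p ↔ BSet land i j p := by
      intro p
      by_cases hland : cellB land (i, j) = 1
      · have hOs : OilAt land (i, j) := oil_of_landGet land i j hi hj hjw hland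
        have hvis : (i, j) ∈ st.1 := by
          by_contra hc
          exact hg ⟨hland, hc⟩
        exact fset_dup_seed land _ _ (i, j) hS' ((hseen _).mp hvis) p
      · exact fset_dead_seed land _ _ (i, j) hS' (fun hO => hland hO.2) p
    refine ⟨fun p => (hseen p).trans (habsorb p).symm, hlen, ?_⟩
    intro k hk
    obtain ⟨Lk, hknd, hkchar, hkget⟩ := hcolsInv k hk
    exact ⟨Lk, hknd, fun p => (hkchar p).trans (and_congr_left' (habsorb p).symm), hkget⟩

lemma invB_congr (land : List (List Int)) (i j i' j' : Int)
    (h : ∀ p, BSet land i j p ↔ BSet land i' j' p) (st : PySem.Set (Int × Int) × List Int)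
    (hInv : InvB land i j st) : InvB land i' j' st := by
  obtain ⟨ch, len, cols⟩ := hInv
  refine ⟨fun p => (ch p).trans (h p), len, ?_⟩
  intro k hk
  obtain ⟨Lk, a, b, c⟩ := cols k hk
  exact ⟨Lk, a, fun p => (b p).trans (and_congr_left' (h p)), c⟩

lemma invB_init (land : List (List Int)) :
    InvB land 0 0
      ((PySem.Set.empty : PySem.Set (Int × Int)), List.replicate (land.headD []).length 0) := by
  have hempty : ∀ p, ¬ BSet land 0 0 p := by
    rintro p ⟨_, x, hSx, hOx, _⟩
    have h1 := hOx.1.1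
    have h2 := hOx.1.2.2.1
    rcases hSx with h | ⟨_, h⟩ <;> omega
  refine ⟨?_, by simp, ?_⟩
  · intro p
    simp only [PySem.Set.empty, List.not_mem_nil, false_iff]
    exact hempty p
  · intro k hk
    refine ⟨[], List.nodup_nil, ?_, ?_⟩
    · intro p
      simp only [List.not_mem_nil, false_iff]
      rintro ⟨hB, _⟩
      exact hempty p hB
    · simp only [List.length_nil, Nat.cast_zero]
      exact List.getD_replicate 0 hk

lemma rowB_spec (land : List (List Int)) (i : Int) (hi : 0 ≤ i) :
    ∀ (u : ℕ), u ≤ (land.headD []).length → ∀ st, InvB land i 0 st →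
      InvB land i (u : Int) ((PySem.List.pyRange 0 (u : Int) 1).foldl
        (visitB land (land.length : Int) ((land.headD []).length : Int) i) st) := by
  intro u
  induction u with
  | zero =>
    intro _ st hInv
    rw [Nat.cast_zero, PySem.List.pyRange_one_eq_nil (by omega)]
    exact hInv
  | succ u ih =>
    intro hu st hInv
    have hcast : ((u + 1 : ℕ) : Int) = (u : Int) + 1 := by push_cast; ring
    rw [hcast, PySem.List.pyRange_one_succ_right (by omega), List.foldl_append,
      List.foldl_cons, List.foldl_nil]
    exact visitB_spec land i (u : Int) hi (by omega) (by exact_mod_cast by omega)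
      _ (ih (by omega) st hInv)

lemma loopB_go (land : List (List Int)) :
    ∀ (r : ℕ), r ≤ land.length →
      InvB land (r : Int) 0 ((PySem.List.pyRange 0 (r : Int) 1).foldl
        (fun st i => (PySem.List.pyRange 0 ((land.headD []).length : Int) 1).foldl
          (visitB land (land.length : Int) ((land.headD []).length : Int) i) st)
        ((PySem.Set.empty : PySem.Set (Int × Int)),
          List.replicate (land.headD []).length 0)) := by
  intro r
  induction r with
  | zero =>
    intro _
    rw [show PySem.List.pyRange 0 ((0 : ℕ) : Int) 1 = [] from
      PySem.List.pyRange_one_eq_nil (by simp), List.foldl_nil]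
    exact_mod_cast invB_init land
  | succ r ih =>
    intro hr
    have hcast : ((r + 1 : ℕ) : Int) = (r : Int) + 1 := by push_cast; ring
    rw [hcast, PySem.List.pyRange_one_succ_right (by omega), List.foldl_append,
      List.foldl_cons, List.foldl_nil]
    have hrow := rowB_spec land (r : Int) (by omega) (land.headD []).length le_rfl
      _ (ih (by omega))
    refine invB_congr land (r : Int) ((land.headD []).length : Int) ((r : Int) + 1) 0 ?_ _ hrow
    intro p
    refine fset_congr_seeds land _ _ ?_ p
    intro x hOx
    have h2 := hOx.1.2.2.2
    have h3 := hOx.1.2.2.1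
    omega

/-- B's whole double fold establishes `InvB` at the end of the grid -/
lemma loopB_spec (land : List (List Int)) :
    InvB land (land.length : Int) 0
      ((PySem.List.pyRange 0 (land.length : Int) 1).foldl (fun st i =>
        (PySem.List.pyRange 0 ((land.headD []).length : Int) 1).foldl
          (visitB land (land.length : Int) ((land.headD []).length : Int) i) st)
        ((PySem.Set.empty : PySem.Set (Int × Int)),
          List.replicate (land.headD []).length 0)) :=
  loopB_go land land.length le_rfl

/-- A's outer fold over columns: each processed column holds its region size, the rest 0 -/
lemma resultA_spec (land : List (List Int)) :
    ∀ (u : ℕ), u ≤ (land.headD []).length →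
      ((PySem.List.pyRange 0 (u : Int) 1).foldl
        (fun result j => ((PySem.List.pyRange 0 (land.length : Int) 1).foldl
          (pvStepA land (land.length : Int) ((land.headD []).length : Int) j)
          (List.replicate land.length (List.replicate (land.headD []).length false),
            result)).2)
        (List.replicate (land.headD []).length 0)).length = (land.headD []).length ∧
      (∀ k : ℕ, k < u →
        ColOK land (k : Int) (((PySem.List.pyRange 0 (u : Int) 1).foldl
          (fun result j => ((PySem.List.pyRange 0 (land.length : Int) 1).foldl
            (pvStepA land (land.length : Int) ((land.headD []).length : Int) j)
            (List.replicate land.length (List.replicate (land.headD []).length false),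
              result)).2)
          (List.replicate (land.headD []).length 0)).getD k 0)) ∧
      (∀ k : ℕ, u ≤ k → k < (land.headD []).length →
        ((PySem.List.pyRange 0 (u : Int) 1).foldl
          (fun result j => ((PySem.List.pyRange 0 (land.length : Int) 1).foldl
            (pvStepA land (land.length : Int) ((land.headD []).length : Int) j)
            (List.replicate land.length (List.replicate (land.headD []).length false),
              result)).2)
          (List.replicate (land.headD []).length 0)).getD k 0 = 0) := by
  intro u
  induction u with
  | zero =>
    intro _
    rw [show PySem.List.pyRange 0 ((0 : ℕ) : Int) 1 = [] from
      PySem.List.pyRange_one_eq_nil (by simp), List.foldl_nil]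
    refine ⟨by simp, by omega, ?_⟩
    intro k _ hk
    exact List.getD_replicate 0 hk
  | succ u ih =>
    intro hu
    obtain ⟨ihlen, ihok, ihzero⟩ := ih (by omega)
    have hcast : ((u + 1 : ℕ) : Int) = (u : Int) + 1 := by push_cast; ring
    rw [hcast, PySem.List.pyRange_one_succ_right (by omega), List.foldl_append,
      List.foldl_cons, List.foldl_nil]
    obtain ⟨L, hnd, hchar, _, hclen, hcj, hck⟩ := colA_spec land (u : Int) (by omega)
      (by exact_mod_cast by omega) land.length _ ihlen
    have htn : ((u : Int)).toNat = u := Int.toNat_natCast u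
    rw [htn] at hcj hck
    constructor
    · rw [hclen, ihlen]
    constructor
    · intro k hk
      by_cases hku : k = u
      · subst hku
        rw [hcj, ihzero k le_rfl (by omega)]
        refine ⟨L, hnd, ?_, by ring⟩
        intro p
        rw [hchar p]
        refine fset_congr_seeds land _ _ ?_ p
        intro x hOx
        have := hOx.1.2.1
        constructor
        · rintro ⟨_, h⟩; exact h
        · intro h; exact ⟨by omega, h⟩
      · have hk' : k < u := by omega
        rw [hck k (by rw [ihlen]; omega) (by omega)]
        exact ihok k hk'
    · intro k hk1 hk2
      rw [hck k (by rw [ihlen]; omega) (by omega)]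
      exact ihzero k (by omega) hk2

/-- both programs compute the same per-column totals, hence the same answer -/
lemma main_eq (land : List (List Int)) : solution land = solution_alt land := by
  obtain ⟨hAlen, hAok, _⟩ := resultA_spec land (land.headD []).length le_rfl
  obtain ⟨_, hBlen, hBcols⟩ := loopB_spec land
  have hBok : ∀ k : ℕ, k < (land.headD []).length →
      ColOK land (k : Int)
        (((PySem.List.pyRange 0 (land.length : Int) 1).foldl (fun st i =>
          (PySem.List.pyRange 0 ((land.headD []).length : Int) 1).foldl
            (visitB land (land.length : Int) ((land.headD []).length : Int) i) st)
          ((PySem.Set.empty : PySem.Set (Int × Int)),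
            List.replicate (land.headD []).length 0)).2.getD k 0) := by
    intro k hk
    obtain ⟨Lk, hknd, hkchar, hkget⟩ := hBcols k hk
    refine ⟨Lk, hknd, ?_, hkget⟩
    intro p
    rw [hkchar p]
    constructor
    · rintro ⟨_, h⟩; exact h
    · intro h
      refine ⟨?_, h⟩
      obtain ⟨hOp, c0, hc0k, hOc0, hRc0⟩ := h
      exact ⟨hOp, c0, Or.inl hOc0.1.2.1, hOc0, hRc0⟩
  have hres : ((PySem.List.pyRange 0 ((land.headD []).length : Int) 1).foldl
        (fun result j => ((PySem.List.pyRange 0 (land.length : Int) 1).foldl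
          (pvStepA land (land.length : Int) ((land.headD []).length : Int) j)
          (List.replicate land.length (List.replicate (land.headD []).length false),
            result)).2)
        (List.replicate (land.headD []).length 0)) =
      ((PySem.List.pyRange 0 (land.length : Int) 1).foldl (fun st i =>
        (PySem.List.pyRange 0 ((land.headD []).length : Int) 1).foldl
          (visitB land (land.length : Int) ((land.headD []).length : Int) i) st)
        ((PySem.Set.empty : PySem.Set (Int × Int)),
          List.replicate (land.headD []).length 0)).2 := by
    apply List.ext_getElem
    · rw [hAlen, hBlen]
    · intro n h1 h2
      have hn : n < (land.headD []).length := by rw [← hAlen]; exact h1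
      have hA := hAok n hn
      have hB := hBok n hn
      rw [List.getD_eq_getElem _ _ h1] at hA
      rw [List.getD_eq_getElem _ _ h2] at hB
      exact colOK_unique land (n : Int) _ _ hA hB
  show (PySem.List.max? ((PySem.List.pyRange 0 ((land.headD []).length : Int) 1).foldl
        (fun result j => ((PySem.List.pyRange 0 (land.length : Int) 1).foldl
          (pvStepA land (land.length : Int) ((land.headD []).length : Int) j)
          (List.replicate land.length (List.replicate (land.headD []).length false),
            result)).2)
        (List.replicate (land.headD []).length 0)) (fun y => y)).getD 0 =
      (PySem.List.max? ((PySem.List.pyRange 0 (land.length : Int) 1).foldl (fun st i =>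
        (PySem.List.pyRange 0 ((land.headD []).length : Int) 1).foldl
          (visitB land (land.length : Int) ((land.headD []).length : Int) i) st)
        ((PySem.Set.empty : PySem.Set (Int × Int)),
          List.replicate (land.headD []).length 0)).2 (fun y => y)).getD 0
  rw [hres]

-- ===== VERDICT (by name: the statement is the Claim_ definition above) =====
theorem solution_spec : Claim_equal_solution := by
  intro land _ _
  exact main_eq land
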